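-- pv_equiv track=rewrite | github.com/981377660LMT/algorithm-study | 14_并查集/经典题/阻断左上角到右下角的路-虚拟添加.py | solve
-- ===== SOURCE A (Python) =====
-- from collections import defaultdict
-- from typing import DefaultDict, List
--
-- class UnionFindArray:
--     def __init__(self, n: int):
--         self.n = n
--         self.count = n
--         self.parent = list(range(n))
--         self.rank = [1] * n
--
--     def find(self, x: int) -> int:
--         if x != self.parent[x]:
--             self.parent[x] = self.find(self.parent[x])
--         return self.parent[x]
--
--     def union(self, x: int, y: int) -> bool:
--         rootX = self.find(x)
--         rootY = self.find(y)
--         if rootX == rootY: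
--             return False
--         if self.rank[rootX] > self.rank[rootY]:
--             rootX, rootY = rootY, rootX
--         self.parent[rootX] = rootY
--         self.rank[rootY] += self.rank[rootX]
--         self.count -= 1
--         return True
--
--     def isConnected(self, x: int, y: int) -> bool:
--         return self.find(x) == self.find(y)
--
--     def getGroups(self) -> DefaultDict[int, List[int]]:
--         groups = defaultdict(list)
--         for key in range(self.n):
--             root = self.find(key)
--             groups[root].append(key)
--         return groups
--
-- DIR8 = ((0, 1), (1, 0), (0, -1), (-1, 0), (1, 1), (1, -1), (-1, 1), (-1, -1))
--
-- def solve(matrix: List[List[int]]) -> int: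
--     # !如果障碍物阻断了上右边到左下边的路径 那么此时两点就不连通
--     ROW, COL = len(matrix), len(matrix[0])
--     uf = UnionFindArray(ROW * COL + 10)
--
--     P1, P2 = ROW * COL + 5, ROW * COL + 6  # !右上边 左下边 如果这两个虚拟点相连 那么就被阻断了
--     for r in range(ROW):
--         for c in range(COL):
--             if matrix[r][c] == 1:  # 障碍物
--                 cur = r * COL + c
--                 for dr, dc in DIR8:
--                     nr, nc = r + dr, c + dc
--                     if 0 <= nr < ROW and 0 <= nc < COL:
--                         next = nr * COL + nc
--                         if matrix[nr][nc] == 1: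
--                             uf.union(cur, next)
--                     else:
--                         if nr < 0 or nc >= COL:
--                             uf.union(cur, P1)
--                         elif nr >= ROW or nc < 0:
--                             uf.union(cur, P2)
--
--     if uf.isConnected(P1, P2):
--         return 0
--
--     root1, root2 = uf.find(P1), uf.find(P2)
--     # 中间如果能多一个点相连，那么就只需要1个
--     for r in range(ROW):
--         for c in range(COL):
--             if matrix[r][c] == 0:
--                 if (r, c) in [(0, 0), (ROW - 1, COL - 1)]:
--                     continue
--
--                 # !看连接以后是否能把两个组连起来(中间一个人牵着左右手)
--                 # !类似827. 最大人工岛的虚拟添加的技巧 找连接后影响的组 而不是真正去连接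
--                 roots = set()
--                 for dr, dc in DIR8:
--                     nr, nc = r + dr, c + dc
--                     if 0 <= nr < ROW and 0 <= nc < COL:
--                         if matrix[nr][nc] == 1:
--                             roots.add(uf.find(nr * COL + nc))
--                     else:
--                         if nr < 0 or nc >= COL:
--                             roots.add(root1)
--                         elif nr >= ROW or nc < 0:
--                             roots.add(root2)
--                 if root1 in roots and root2 in roots:
--                     return 1
--
--     return 2
-- ===== SOURCE B (Python) =====
-- DIR8 = ((0, 1), (1, 0), (0, -1), (-1, 0), (1, 1), (1, -1), (-1, 1), (-1, -1))
--
--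
-- def locate(groups, x):
--     for g in groups:
--         if x in g:
--             return g
--     return None
--
--
-- def merge(groups, u, v):
--     gu, gv = locate(groups, u), locate(groups, v)
--     if gu is None and gv is None:
--         return groups + [[u, v]]
--     if gu is None:
--         return [g + [u] if g == gv else g for g in groups]
--     if gv is None:
--         return [g + [v] if g == gu else g for g in groups]
--     if gu == gv:
--         return groups
--     return [g for g in groups if g != gu and g != gv] + [gu + gv]
--
--
-- def together(groups, u, v):
--     if u == v:
--         return True
--     gu = locate(groups, u)
--     return gu is not None and v in gu
--
--
-- def target(matrix, ROW, COL, nr, nc, P1, P2):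
--     """Merge target seen from an obstacle cell in one direction, or None."""
--     if 0 <= nr < ROW and 0 <= nc < COL:
--         return nr * COL + nc if matrix[nr][nc] == 1 else None
--     if nr < 0 or nc >= COL:
--         return P1
--     return P2
--
--
-- def edge_list(matrix, ROW, COL, P1, P2):
--     """All merge edges, collected in one staged pass over the grid."""
--     edges = []
--     for r in range(ROW):
--         for c in range(COL):
--             if matrix[r][c] == 1:
--                 for dr, dc in DIR8:
--                     t = target(matrix, ROW, COL, r + dr, c + dc, P1, P2)
--                     if t is not None:
--                         edges.append((r * COL + c, t))
--     return edges
--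
--
-- def sees_top(matrix, ROW, COL, P1, groups, r, c):
--     for dr, dc in DIR8:
--         nr, nc = r + dr, c + dc
--         if 0 <= nr < ROW and 0 <= nc < COL:
--             if matrix[nr][nc] == 1 and together(groups, nr * COL + nc, P1):
--                 return True
--         elif nr < 0 or nc >= COL:
--             return True
--     return False
--
--
-- def sees_bot(matrix, ROW, COL, P2, groups, r, c):
--     for dr, dc in DIR8:
--         nr, nc = r + dr, c + dc
--         if 0 <= nr < ROW and 0 <= nc < COL:
--             if matrix[nr][nc] == 1 and together(groups, nr * COL + nc, P2):
--                 return True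
--         elif nr >= ROW or nc < 0:
--             return True
--     return False
--
--
-- def solve(matrix):
--     ROW, COL = len(matrix), len(matrix[0])
--     P1, P2 = ROW * COL + 5, ROW * COL + 6  # virtual top/right side and bottom/left side
--
--     groups = []
--     for u, v in edge_list(matrix, ROW, COL, P1, P2):
--         groups = merge(groups, u, v)
--
--     if together(groups, P1, P2):
--         return 0
--
--     for r in range(ROW):
--         for c in range(COL):
--             if matrix[r][c] == 0 and (r, c) != (0, 0) and (r, c) != (ROW - 1, COL - 1):
--                 if sees_top(matrix, ROW, COL, P1, groups, r, c) and sees_bot(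
--                     matrix, ROW, COL, P2, groups, r, c
--                 ):
--                     return 1
--     return 2
-- ===== Notes on version B (the rewrite author's own statement) =====
-- stated objective: alternative
-- what changed: A's interleaved, path-compressed, rank-balanced union-find (with two virtual boundary nodes and a roots-set per empty cell) is replaced by a staged pipeline: first collect the complete merge-edge list in one pass over the grid, then fold an explicit partition (list of disjoint component lists, merged by locate-and-concatenate) over that edge list, then decide phase 2 with two short-circuit any-predicates (sees the top/right side, sees the bottom/left side) per empty non-corner cell.
import Mathlib
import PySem

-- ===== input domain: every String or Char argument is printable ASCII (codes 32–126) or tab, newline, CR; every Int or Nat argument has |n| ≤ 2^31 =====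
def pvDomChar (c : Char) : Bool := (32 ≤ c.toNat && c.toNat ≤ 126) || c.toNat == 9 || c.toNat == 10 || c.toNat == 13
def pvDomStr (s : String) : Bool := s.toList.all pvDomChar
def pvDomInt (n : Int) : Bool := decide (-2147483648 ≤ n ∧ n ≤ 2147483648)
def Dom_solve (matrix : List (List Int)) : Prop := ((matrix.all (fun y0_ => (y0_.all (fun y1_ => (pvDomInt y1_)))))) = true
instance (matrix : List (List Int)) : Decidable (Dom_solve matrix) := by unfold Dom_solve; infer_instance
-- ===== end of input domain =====

-- B replaces A's interleaved, path-compressed, rank-balanced union-find by a staged pipeline: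
-- first collect the whole merge-edge list in one pass, then fold a list-of-disjoint-lists
-- partition over it, then answer phase 2 with two any-based boundary predicates per empty cell;
-- objective: alternative (same value).

-- ===== PORT A =====
def DIR8L : List (Int × Int) := [(0,1),(1,0),(0,-1),(-1,0),(1,1),(1,-1),(-1,1),(-1,-1)]

def matGet (matrix : List (List Int)) (r c : Nat) : Int := (matrix.getD r []).getD c 0

structure UF where
  n : Nat
  count : Nat
  parent : Array Nat
  rank : Array Nat

def ufInit (n : Nat) : UF := ⟨n, n, Array.range n, Array.replicate n 1⟩

-- literal port of UnionFindArray.find (recursive, path compression); fuel self.n suffices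
-- because parent chains of the forest are acyclic (proved below)
def ufFind : Nat → UF → Nat → UF × Nat
  | 0, uf, x => (uf, x)
  | fuel+1, uf, x =>
    let px := uf.parent.getD x x
    if x ≠ px then
      let res := ufFind fuel uf px
      ({ res.1 with parent := res.1.parent.setIfInBounds x res.2 }, res.2)
    else (uf, x)

def ufUnion (uf : UF) (x y : Nat) : UF × Bool :=
  let r1 := ufFind uf.n uf x
  let r2 := ufFind r1.1.n r1.1 y
  let uf2 := r2.1
  if r1.2 = r2.2 then (uf2, false)
  else
    let p := if uf2.rank.getD r1.2 0 > uf2.rank.getD r2.2 0 then (r2.2, r1.2) else (r1.2, r2.2)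
    ({ uf2 with count := uf2.count - 1,
                parent := uf2.parent.setIfInBounds p.1 p.2,
                rank := uf2.rank.setIfInBounds p.2 (uf2.rank.getD p.2 0 + uf2.rank.getD p.1 0) }, true)

def aPhase1 (matrix : List (List Int)) (ROW COL P1 P2 : Nat) : UF :=
  (List.range ROW).foldl (fun uf r =>
    (List.range COL).foldl (fun uf c =>
      if matGet matrix r c = 1 then
        DIR8L.foldl (fun uf d =>
          let nr : Int := (r : Int) + d.1
          let nc : Int := (c : Int) + d.2
          if 0 ≤ nr ∧ nr < (ROW : Int) ∧ 0 ≤ nc ∧ nc < (COL : Int) then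
            if matGet matrix nr.toNat nc.toNat = 1 then
              (ufUnion uf (r * COL + c) (nr.toNat * COL + nc.toNat)).1
            else uf
          else if nr < 0 ∨ (COL : Int) ≤ nc then (ufUnion uf (r * COL + c) P1).1
          else if (ROW : Int) ≤ nr ∨ nc < 0 then (ufUnion uf (r * COL + c) P2).1
          else uf) uf
      else uf) uf) (ufInit (ROW * COL + 10))

def aPhase2 (matrix : List (List Int)) (ROW COL root1 root2 : Nat) (uf : UF) : UF × Bool :=
  (List.range ROW).foldl (fun (st : UF × Bool) r =>
    (List.range COL).foldl (fun (st : UF × Bool) c =>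
      if st.2 then st else
      if matGet matrix r c = 0 then
        if (r = 0 ∧ c = 0) ∨ (r = ROW - 1 ∧ c = COL - 1) then st
        else
          let acc := DIR8L.foldl (fun (acc : UF × PySem.Set Nat) d =>
            let nr : Int := (r : Int) + d.1
            let nc : Int := (c : Int) + d.2
            if 0 ≤ nr ∧ nr < (ROW : Int) ∧ 0 ≤ nc ∧ nc < (COL : Int) then
              if matGet matrix nr.toNat nc.toNat = 1 then
                let fr := ufFind acc.1.n acc.1 (nr.toNat * COL + nc.toNat)
                (fr.1, PySem.Set.add acc.2 fr.2)
              else acc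
            else if nr < 0 ∨ (COL : Int) ≤ nc then (acc.1, PySem.Set.add acc.2 root1)
            else if (ROW : Int) ≤ nr ∨ nc < 0 then (acc.1, PySem.Set.add acc.2 root2)
            else acc) (st.1, PySem.Set.empty)
          if root1 ∈ acc.2 ∧ root2 ∈ acc.2 then (acc.1, true) else (acc.1, false)
      else st) st) (uf, false)

def solve (matrix : List (List Int)) : Int :=
  let ROW := matrix.length
  let COL := (matrix.headD []).length
  let P1 := ROW * COL + 5
  let P2 := ROW * COL + 6
  let uf := aPhase1 matrix ROW COL P1 P2
  -- uf.isConnected(P1, P2)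
  let fc1 := ufFind uf.n uf P1
  let fc2 := ufFind fc1.1.n fc1.1 P2
  if fc1.2 = fc2.2 then 0
  else
    let f1 := ufFind fc2.1.n fc2.1 P1
    let f2 := ufFind f1.1.n f1.1 P2
    if (aPhase2 matrix ROW COL f1.2 f2.2 f2.1).2 then 1 else 2


-- ===== PORT B =====

def locateG (groups : List (List Nat)) (x : Nat) : Option (List Nat) :=
  groups.find? (fun g => x ∈ g)

def mergeG (groups : List (List Nat)) (u v : Nat) : List (List Nat) :=
  match locateG groups u, locateG groups v with
  | none, none => groups ++ [[u, v]]
  | none, some gv => groups.map (fun g => if g = gv then g ++ [u] else g)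
  | some gu, none => groups.map (fun g => if g = gu then g ++ [v] else g)
  | some gu, some gv =>
    if gu = gv then groups
    else (groups.filter (fun g => g ≠ gu ∧ g ≠ gv)) ++ [gu ++ gv]

def togetherG (groups : List (List Nat)) (u v : Nat) : Bool :=
  if u = v then true else
  match locateG groups u with
  | none => false
  | some gu => v ∈ gu

-- target(matrix, ROW, COL, nr, nc, P1, P2): merge target in one direction, or none
def tgt? (matrix : List (List Int)) (ROW COL : Nat) (nr nc : Int) (P1 P2 : Nat) : Option Nat :=
  if 0 ≤ nr ∧ nr < (ROW : Int) ∧ 0 ≤ nc ∧ nc < (COL : Int) then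
    if matGet matrix nr.toNat nc.toNat = 1 then some (nr.toNat * COL + nc.toNat) else none
  else if nr < 0 ∨ (COL : Int) ≤ nc then some P1
  else some P2

-- edge_list: the staged pass collecting every merge edge
def edgeList (matrix : List (List Int)) (ROW COL P1 P2 : Nat) : List (Nat × Nat) :=
  (List.range ROW).flatMap (fun r =>
    (List.range COL).flatMap (fun c =>
      if matGet matrix r c = 1 then
        DIR8L.filterMap (fun d =>
          (tgt? matrix ROW COL ((r : Int) + d.1) ((c : Int) + d.2) P1 P2).map
            (fun t => (r * COL + c, t)))
      else []))

def seesTop (matrix : List (List Int)) (ROW COL P1 : Nat) (gs : List (List Nat)) (r c : Nat) : Bool :=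
  DIR8L.any (fun d =>
    let nr : Int := (r : Int) + d.1
    let nc : Int := (c : Int) + d.2
    if 0 ≤ nr ∧ nr < (ROW : Int) ∧ 0 ≤ nc ∧ nc < (COL : Int) then
      decide (matGet matrix nr.toNat nc.toNat = 1) && togetherG gs (nr.toNat * COL + nc.toNat) P1
    else decide (nr < 0 ∨ (COL : Int) ≤ nc))

def seesBot (matrix : List (List Int)) (ROW COL P2 : Nat) (gs : List (List Nat)) (r c : Nat) : Bool :=
  DIR8L.any (fun d =>
    let nr : Int := (r : Int) + d.1
    let nc : Int := (c : Int) + d.2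
    if 0 ≤ nr ∧ nr < (ROW : Int) ∧ 0 ≤ nc ∧ nc < (COL : Int) then
      decide (matGet matrix nr.toNat nc.toNat = 1) && togetherG gs (nr.toNat * COL + nc.toNat) P2
    else decide ((ROW : Int) ≤ nr ∨ nc < 0))

def solve_alt (matrix : List (List Int)) : Int :=
  let ROW := matrix.length
  let COL := (matrix.headD []).length
  let P1 := ROW * COL + 5
  let P2 := ROW * COL + 6
  let gs := (edgeList matrix ROW COL P1 P2).foldl (fun gs e => mergeG gs e.1 e.2) []
  if togetherG gs P1 P2 then 0
  else if (List.range ROW).any (fun r => (List.range COL).any (fun c =>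
      (decide (matGet matrix r c = 0) &&
        !((decide (r = 0) && decide (c = 0)) ||
          (decide (r = ROW - 1) && decide (c = COL - 1)))) &&
      (seesTop matrix ROW COL P1 gs r c && seesBot matrix ROW COL P2 gs r c)))
  then 1 else 2

-- ===== PRECONDITION & SPEC =====
-- Pre excludes exactly the inputs where Python A raises IndexError: the empty matrix
-- (matrix[0]) and matrices having a row shorter than the first row (matrix[r][c] for c < COL).
def Pre_solve (matrix : List (List Int)) : Prop :=
  matrix ≠ [] ∧ ∀ row ∈ matrix, (matrix.headD []).length ≤ row.length
instance (matrix : List (List Int)) : Decidable (Pre_solve matrix) := by unfold Pre_solve; infer_instance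

def pvWitness_solve : List (List Int) := [[1, 0], [0, 1]]

def Spec_solve (matrix : List (List Int)) (out : Int) : Prop := out = solve_alt matrix
instance (matrix : List (List Int)) (out : Int) : Decidable (Spec_solve matrix out) := by unfold Spec_solve; infer_instance

-- ===== CLAIM (what is proved, stated in full; the proofs are below) =====
def Claim_equal_solve : Prop := ∀ (matrix : List (List Int)), Dom_solve matrix → Pre_solve matrix → Spec_solve matrix (solve matrix)

-- ===== LEMMAS AND PROOFS =====
-- ================= proof-side model of B: the same partition built A's way =================
-- (used only in the proofs: the interleaved nested-fold formulation that bisimulates A's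
-- union-find step by step; bridged to B's staged formulation at the end)

def bPhase1 (matrix : List (List Int)) (ROW COL P1 P2 : Nat) : List (List Nat) :=
  (List.range ROW).foldl (fun gs r =>
    (List.range COL).foldl (fun gs c =>
      if matGet matrix r c = 1 then
        DIR8L.foldl (fun gs d =>
          let nr : Int := (r : Int) + d.1
          let nc : Int := (c : Int) + d.2
          if 0 ≤ nr ∧ nr < (ROW : Int) ∧ 0 ≤ nc ∧ nc < (COL : Int) then
            if matGet matrix nr.toNat nc.toNat = 1 then
              mergeG gs (r * COL + c) (nr.toNat * COL + nc.toNat)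
            else gs
          else if nr < 0 ∨ (COL : Int) ≤ nc then mergeG gs (r * COL + c) P1
          else mergeG gs (r * COL + c) P2) gs
      else gs) gs) []

def bCellSees (matrix : List (List Int)) (ROW COL P1 P2 : Nat) (gs : List (List Nat)) (r c : Nat) : Bool :=
  if matGet matrix r c = 0 ∧ ¬((r = 0 ∧ c = 0) ∨ (r = ROW - 1 ∧ c = COL - 1)) then
    let sees := DIR8L.foldl (fun (s : Bool × Bool) d =>
      let nr : Int := (r : Int) + d.1
      let nc : Int := (c : Int) + d.2
      if 0 ≤ nr ∧ nr < (ROW : Int) ∧ 0 ≤ nc ∧ nc < (COL : Int) then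
        if matGet matrix nr.toNat nc.toNat = 1 then
          (s.1 || togetherG gs (nr.toNat * COL + nc.toNat) P1,
           s.2 || togetherG gs (nr.toNat * COL + nc.toNat) P2)
        else s
      else if nr < 0 ∨ (COL : Int) ≤ nc then (true, s.2)
      else (s.1, true)) (false, false)
    sees.1 && sees.2
  else false

-- ================= union-find infrastructure =================

def iterF (f : Nat → Nat) : Nat → Nat → Nat
  | 0, x => x
  | k+1, x => iterF f k (f x)

def pfUF (uf : UF) : Nat → Nat := fun y => uf.parent.getD y y

def IsRootF (f : Nat → Nat) (r : Nat) : Prop := f r = r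

def ReachF (f : Nat → Nat) (x r : Nat) : Prop := ∃ k, iterF f k x = r

def connF (f : Nat → Nat) (x y : Nat) : Prop :=
  ∃ r, IsRootF f r ∧ ReachF f x r ∧ ReachF f y r

def inSame (gs : List (List Nat)) (x y : Nat) : Prop := ∃ g ∈ gs, x ∈ g ∧ y ∈ g

def GInv (n : Nat) (gs : List (List Nat)) : Prop :=
  (∀ g ∈ gs, g ≠ [] ∧ ∀ v ∈ g, v < n) ∧
  gs.Pairwise (fun g h => ∀ v, v ∈ g → v ∉ h)

def InvR (n : Nat) (uf : UF) (gs : List (List Nat)) : Prop :=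
  uf.n = n ∧ uf.parent.size = n ∧
  (∀ y, y < n → pfUF uf y < n) ∧
  (∀ x, x < n → ∃ r, IsRootF (pfUF uf) r ∧ ReachF (pfUF uf) x r) ∧
  GInv n gs ∧
  (∀ x y, x < n → y < n → (connF (pfUF uf) x y ↔ (x = y ∨ inSame gs x y)))

def updF (f : Nat → Nat) (a b : Nat) : Nat → Nat := fun y => if y = a then b else f y

theorem iterF_add (f : Nat → Nat) (a b x : Nat) :
    iterF f (a + b) x = iterF f b (iterF f a x) := by
  induction a generalizing x with
  | zero => simp [iterF]
  | succ a ih => rw [Nat.succ_add]; simp only [iterF]; exact ih (f x)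

theorem iterF_root (f : Nat → Nat) {r : Nat} (h : IsRootF f r) (k : Nat) :
    iterF f k r = r := by
  induction k with
  | zero => rfl
  | succ k ih => simp only [iterF]; rw [h]; exact ih

theorem reach_unique {f : Nat → Nat} {x r r' : Nat}
    (hr : IsRootF f r) (hr' : IsRootF f r')
    (h1 : ReachF f x r) (h2 : ReachF f x r') : r = r' := by
  obtain ⟨k, hk⟩ := h1
  obtain ⟨k', hk'⟩ := h2
  rcases Nat.le_total k k' with h | h
  · have : iterF f k' x = iterF f (k' - k) (iterF f k x) := by
      rw [← iterF_add]; congr 1; omega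
    rw [hk, iterF_root f hr] at this
    rw [← hk', this]
  · have : iterF f k x = iterF f (k - k') (iterF f k' x) := by
      rw [← iterF_add]; congr 1; omega
    rw [hk', iterF_root f hr'] at this
    rw [← hk, this]

theorem reach_refl (f : Nat → Nat) (x : Nat) : ReachF f x x := ⟨0, rfl⟩

theorem reach_cons {f : Nat → Nat} {x r : Nat} (h : ReachF f (f x) r) : ReachF f x r := by
  obtain ⟨k, hk⟩ := h; exact ⟨k + 1, hk⟩

theorem reach_lt {n : Nat} {f : Nat → Nat} (hcl : ∀ y, y < n → f y < n)
    {x r : Nat} (hx : x < n) (h : ReachF f x r) : r < n := by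
  obtain ⟨k, hk⟩ := h
  induction k generalizing x with
  | zero => exact hk ▸ hx
  | succ k ih => exact ih (hcl x hx) hk

-- compression update: rewrite a non-root x directly to its root r
theorem updF_compress {f : Nat → Nat} {x r : Nat}
    (hroot : IsRootF f r) (hreach : ReachF f x r) (hxr : x ≠ r) :
    (∀ r', IsRootF (updF f x r) r' ↔ IsRootF f r') ∧
    (∀ z r', IsRootF f r' → (ReachF (updF f x r) z r' ↔ ReachF f z r')) := by
  have hxnr : f x ≠ x := by
    intro h
    exact hxr (reach_unique h hroot (reach_refl f x) hreach)
  have hrx : r ≠ x := Ne.symm hxr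
  have hrootr' : IsRootF (updF f x r) r := by
    simp only [IsRootF, updF, if_neg hrx]; exact hroot
  constructor
  · intro r'
    by_cases h : r' = x
    · rw [h]
      simp only [IsRootF, updF, if_pos rfl]
      exact ⟨fun hh => absurd hh hrx, fun hh => absurd hh hxnr⟩
    · simp only [IsRootF, updF, if_neg h]
  · intro z r' hr'
    constructor
    · rintro ⟨k, hk⟩
      induction k generalizing z with
      | zero => exact hk ▸ reach_refl f z
      | succ k ih =>
        by_cases hz : z = x
        · rw [hz] at hk
          have hk1 : iterF (updF f x r) k (updF f x r x) = r' := hk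
          have hk2 : iterF (updF f x r) k r = r' := by
            simpa only [updF, if_pos rfl] using hk1
          rw [iterF_root _ hrootr'] at hk2
          rw [hz, ← hk2]
          exact hreach
        · have hk1 : iterF (updF f x r) k (f z) = r' := by
            simpa only [iterF, updF, if_neg hz] using hk
          exact reach_cons (ih (f z) hk1)
    · rintro ⟨k, hk⟩
      induction k generalizing z with
      | zero => exact hk ▸ reach_refl _ z
      | succ k ih =>
        by_cases hz : z = x
        · have hzr : ReachF f z r' := ⟨k + 1, hk⟩
          have : r = r' := reach_unique hroot hr' (hz ▸ hreach) hzr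
          rw [hz, ← this]
          exact ⟨1, by simp [iterF, updF]⟩
        · have hk1 : iterF f k (f z) = r' := hk
          obtain ⟨k2, hk2⟩ := ih (f z) hk1
          exact ⟨k2 + 1, by simp only [iterF, updF, if_neg hz]; exact hk2⟩

-- link update: point root a at root b
theorem updF_link {f : Nat → Nat} {a b : Nat}
    (ha : IsRootF f a) (hb : IsRootF f b) (hab : a ≠ b) :
    (∀ r', IsRootF (updF f a b) r' ↔ (IsRootF f r' ∧ r' ≠ a)) ∧
    (∀ z r', IsRootF f r' → r' ≠ a → ReachF f z r' → ReachF (updF f a b) z r') ∧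
    (∀ z, ReachF f z a → ReachF (updF f a b) z b) ∧
    (∀ z r', ReachF (updF f a b) z r' → IsRootF (updF f a b) r' →
        (ReachF f z r' ∨ (r' = b ∧ ReachF f z a))) := by
  have hb' : IsRootF (updF f a b) b := by
    simp only [IsRootF, updF, if_neg (Ne.symm hab)]; exact hb
  refine ⟨?_, ?_, ?_, ?_⟩
  · intro r'
    by_cases h : r' = a
    · rw [h]
      simp only [IsRootF, updF, if_pos rfl]
      constructor
      · intro hh; exact absurd hh (Ne.symm hab)
      · intro hh; exact absurd rfl hh.2
    · simp only [IsRootF, updF, if_neg h]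
      exact ⟨fun hh => ⟨hh, h⟩, fun hh => hh.1⟩
  · rintro z r' hr' hra ⟨k, hk⟩
    induction k generalizing z with
    | zero => exact hk ▸ reach_refl _ z
    | succ k ih =>
      by_cases hz : z = a
      · have : iterF f (k + 1) z = z := by
          rw [hz]
          have : iterF f k (f a) = iterF f k a := by rw [ha]
          rw [show iterF f (k+1) a = iterF f k (f a) from rfl, this, iterF_root f ha]
        rw [this] at hk
        rw [← hk, hz] at hra
        exact absurd rfl hra
      · have hk1 : iterF f k (f z) = r' := hk
        obtain ⟨k2, hk2⟩ := ih (f z) hk1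
        exact ⟨k2 + 1, by simp only [iterF, updF, if_neg hz]; exact hk2⟩
  · rintro z ⟨k, hk⟩
    induction k generalizing z with
    | zero =>
      rw [← hk]
      exact ⟨1, by simp [iterF, updF]⟩
    | succ k ih =>
      by_cases hz : z = a
      · rw [hz]; exact ⟨1, by simp [iterF, updF]⟩
      · have hk1 : iterF f k (f z) = a := hk
        obtain ⟨k2, hk2⟩ := ih (f z) hk1
        exact ⟨k2 + 1, by simp only [iterF, updF, if_neg hz]; exact hk2⟩
  · rintro z r' ⟨k, hk⟩ hr'
    induction k generalizing z with
    | zero => exact Or.inl (hk ▸ reach_refl f z)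
    | succ k ih =>
      by_cases hz : z = a
      · have hk1 : iterF (updF f a b) k (updF f a b z) = r' := hk
        rw [hz] at hk1
        have hk2 : iterF (updF f a b) k b = r' := by
          simpa only [updF, if_pos rfl] using hk1
        rw [iterF_root _ hb'] at hk2
        rw [hz]
        exact Or.inr ⟨hk2.symm, reach_refl f a⟩
      · have hk1 : iterF (updF f a b) k (f z) = r' := by
          simpa only [iterF, updF, if_neg hz] using hk
        rcases ih (f z) hk1 with h | ⟨h1, h2⟩
        · exact Or.inl (reach_cons h)
        · exact Or.inr ⟨h1, reach_cons h2⟩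

-- pigeonhole helpers (elementary, list-based)
theorem remove_one {l : List Nat} {n : Nat} (hmem : n ∈ l) (hnd : l.Nodup) :
    ∃ l' : List Nat, l'.Nodup ∧ l'.length + 1 = l.length ∧ ∀ x ∈ l', x ∈ l ∧ x ≠ n := by
  induction l with
  | nil => cases hmem
  | cons a l ih =>
    have hnd' : l.Nodup := (List.nodup_cons.1 hnd).2
    have hna : a ∉ l := (List.nodup_cons.1 hnd).1
    by_cases han : a = n
    · refine ⟨l, hnd', by simp, ?_⟩
      intro x hx
      refine ⟨by simp [hx], ?_⟩
      intro hxn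
      rw [hxn, ← han] at hx
      exact hna hx
    · have hmem' : n ∈ l := by
        rcases List.mem_cons.1 hmem with h | h
        · exact absurd h.symm han
        · exact h
      obtain ⟨l', h1, h2, h3⟩ := ih hmem' hnd'
      refine ⟨a :: l', ?_, by simp; omega, ?_⟩
      · refine List.nodup_cons.2 ⟨?_, h1⟩
        intro ha
        exact hna (h3 a ha).1
      · intro x hx
        rcases List.mem_cons.1 hx with h | h
        · subst h; exact ⟨by simp, han⟩
        · obtain ⟨hm, hn⟩ := h3 x h
          exact ⟨by simp [hm], hn⟩

theorem list_pigeon (n : Nat) : ∀ (l : List Nat), (∀ x ∈ l, x < n) →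
    n < l.length → ¬ l.Nodup := by
  induction n with
  | zero =>
    intro l hlt hlen _
    match l, hlen with
    | x :: _, _ => exact absurd (hlt x (by simp)) (by omega)
  | succ n ih =>
    intro l hlt hlen hnd
    by_cases hmem : n ∈ l
    · obtain ⟨l', h1, h2, h3⟩ := remove_one hmem hnd
      refine ih l' ?_ (by omega) h1
      intro x hx
      obtain ⟨hm, hn⟩ := h3 x hx
      have := hlt x hm
      omega
    · refine ih l ?_ (by omega) hnd
      intro x hx
      have := hlt x hx
      have hxn : x ≠ n := fun h => hmem (h ▸ hx)
      omega

theorem not_nodup_exists_dup (l : List Nat) (h : ¬ l.Nodup) :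
    ∃ i j, i < j ∧ j < l.length ∧ l.getD i 0 = l.getD j 0 := by
  induction l with
  | nil => exact absurd List.nodup_nil h
  | cons a l ih =>
    by_cases hl : l.Nodup
    · have hmem : a ∈ l := by
        by_contra hm
        exact h (List.nodup_cons.2 ⟨hm, hl⟩)
      obtain ⟨i, hi, hgi⟩ := List.getElem_of_mem hmem
      refine ⟨0, i + 1, by omega, by simp; omega, ?_⟩
      show a = l.getD i 0
      rw [List.getD, List.getElem?_eq_getElem hi, hgi]
      rfl
    · obtain ⟨i, j, hij, hj, heq⟩ := ih hl
      refine ⟨i + 1, j + 1, by omega, by simp; omega, ?_⟩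
      simpa using heq

-- an existing root is reached within n steps when f maps [0,n) into itself
theorem reach_bound {n : Nat} {f : Nat → Nat} (hcl : ∀ y, y < n → f y < n)
    {x : Nat} (hx : x < n) (hr : ∃ k, IsRootF f (iterF f k x)) :
    ∃ k, k ≤ n ∧ IsRootF f (iterF f k x) := by
  obtain ⟨k, hk⟩ := hr
  induction k using Nat.strongRecOn with
  | ind k ihk =>
  by_cases hkn : k ≤ n
  · exact ⟨k, hkn, hk⟩
  · -- prefix of length n+1 of the chain has a duplicate
    have hlt : ∀ i, iterF f i x < n := by
      intro i
      induction i with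
      | zero => exact hx
      | succ i ih =>
        have h1 : iterF f (i + 1) x = f (iterF f i x) := by
          have h2 := iterF_add f i 1 x
          simpa [iterF] using h2
        rw [h1]; exact hcl _ ih
    have hnd : ¬ ((List.range (n + 1)).map (fun i => iterF f i x)).Nodup := by
      apply list_pigeon n
      · intro y hy
        simp only [List.mem_map] at hy
        obtain ⟨i, -, rfl⟩ := hy
        exact hlt i
      · simp
    obtain ⟨i, j, hij, hjlen, heq⟩ :=
      not_nodup_exists_dup ((List.range (n + 1)).map (fun i => iterF f i x)) hnd
    have hjn : j ≤ n := by simp at hjlen; omega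
    have hgd : ∀ m, m ≤ n →
        ((List.range (n + 1)).map (fun i => iterF f i x)).getD m 0 = iterF f m x := by
      intro m hm
      simp [List.getD, List.getElem?_map, List.getElem?_range, Nat.lt_succ_of_le hm]
    rw [hgd i (by omega), hgd j hjn] at heq
    -- chain repeats: shift the root witness down by (j - i)
    have key : ∀ m, iterF f (j + m) x = iterF f (i + m) x := by
      intro m
      rw [iterF_add, iterF_add, heq]
    have hroot' : IsRootF f (iterF f (k - (j - i)) x) := by
      have h1 : iterF f (i + (k - j)) x = iterF f k x := by
        rw [← key]; congr 1; omega
      have h2 : k - (j - i) = i + (k - j) := by omega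
      rw [h2, h1]; exact hk
    exact ihk (k - (j - i)) (by omega) hroot'
theorem getD_setIfInBounds (a : Array Nat) (i v j : Nat) (hi : i < a.size) :
    (a.setIfInBounds i v).getD j j = if j = i then v else a.getD j j := by
  rw [Array.getD_eq_getD_getElem?, Array.getD_eq_getD_getElem?,
    Array.getElem?_setIfInBounds]
  by_cases h : j = i
  · subst h
    rw [if_pos rfl, if_pos rfl, if_pos hi]
    rfl
  · have h' : ¬ i = j := fun hh => h hh.symm
    rw [if_neg h', if_neg h]

theorem pf_set (uf : UF) (x r : Nat) (hx : x < uf.parent.size) :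
    pfUF { uf with parent := uf.parent.setIfInBounds x r } = updF (pfUF uf) x r := by
  funext y
  simp only [pfUF, updF]
  exact getD_setIfInBounds uf.parent x r y hx

theorem conn_transfer {f f' : Nat → Nat}
    (hroot : ∀ r', IsRootF f' r' ↔ IsRootF f r')
    (hreach : ∀ z r', IsRootF f r' → (ReachF f' z r' ↔ ReachF f z r')) (x y : Nat) :
    connF f' x y ↔ connF f x y := by
  constructor
  · rintro ⟨r, h1, h2, h3⟩
    have h1' := (hroot r).1 h1
    exact ⟨r, h1', (hreach x r h1').1 h2, (hreach y r h1').1 h3⟩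
  · rintro ⟨r, h1, h2, h3⟩
    exact ⟨r, (hroot r).2 h1, (hreach x r h1).2 h2, (hreach y r h1).2 h3⟩

theorem ufFind_spec (n : Nat) : ∀ (fuel : Nat) (uf : UF) (x : Nat),
    uf.parent.size = n → (∀ y, y < n → pfUF uf y < n) → x < n →
    (∃ k, k ≤ fuel ∧ IsRootF (pfUF uf) (iterF (pfUF uf) k x)) →
    (ufFind fuel uf x).1.n = uf.n ∧ (ufFind fuel uf x).1.parent.size = n ∧
    (ufFind fuel uf x).1.rank = uf.rank ∧ (ufFind fuel uf x).1.count = uf.count ∧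
    (∀ y, y < n → pfUF (ufFind fuel uf x).1 y < n) ∧
    IsRootF (pfUF uf) (ufFind fuel uf x).2 ∧ ReachF (pfUF uf) x (ufFind fuel uf x).2 ∧
    (∀ r', IsRootF (pfUF (ufFind fuel uf x).1) r' ↔ IsRootF (pfUF uf) r') ∧
    (∀ z r', IsRootF (pfUF uf) r' → (ReachF (pfUF (ufFind fuel uf x).1) z r' ↔ ReachF (pfUF uf) z r')) := by
  intro fuel
  induction fuel with
  | zero =>
    intro uf x hsz hcl hx hb
    obtain ⟨k, hk, hroot⟩ := hb
    have hk0 : k = 0 := by omega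
    subst hk0
    exact ⟨rfl, hsz, rfl, rfl, hcl, hroot, reach_refl _ x,
      fun _ => Iff.rfl, fun _ _ _ => Iff.rfl⟩
  | succ fuel ih =>
    intro uf x hsz hcl hx hb
    by_cases hxp : x ≠ uf.parent.getD x x
    · have hfx : pfUF uf x = uf.parent.getD x x := rfl
      have hxp' : pfUF uf x ≠ x := by rw [hfx]; exact fun h => hxp h.symm
      have hres : ufFind (fuel + 1) uf x =
          ({ (ufFind fuel uf (uf.parent.getD x x)).1 with
             parent := (ufFind fuel uf (uf.parent.getD x x)).1.parent.setIfInBounds x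
               (ufFind fuel uf (uf.parent.getD x x)).2 },
           (ufFind fuel uf (uf.parent.getD x x)).2) := by
        have h0 : ufFind (fuel + 1) uf x =
            (if x ≠ uf.parent.getD x x then
              ({ (ufFind fuel uf (uf.parent.getD x x)).1 with
                 parent := (ufFind fuel uf (uf.parent.getD x x)).1.parent.setIfInBounds x
                   (ufFind fuel uf (uf.parent.getD x x)).2 },
               (ufFind fuel uf (uf.parent.getD x x)).2)
            else (uf, x)) := rfl
        rw [h0, if_pos hxp]
      -- bound for px
      obtain ⟨k, hk, hroot⟩ := hb
      have hkpos : k ≠ 0 := by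
        intro h; subst h
        exact hxp' hroot
      obtain ⟨k', rfl⟩ : ∃ k', k = k' + 1 := ⟨k - 1, by omega⟩
      have hbpx : ∃ k2, k2 ≤ fuel ∧ IsRootF (pfUF uf) (iterF (pfUF uf) k2 (uf.parent.getD x x)) := by
        refine ⟨k', by omega, ?_⟩
        have : iterF (pfUF uf) (k' + 1) x = iterF (pfUF uf) k' (pfUF uf x) := rfl
        rw [this] at hroot
        exact hroot
      have hpxlt : uf.parent.getD x x < n := hcl x hx
      obtain ⟨ihn, ihsz, ihrank, ihcount, ihcl, ihroot, ihreach, ihriff, ihreachiff⟩ :=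
        ih uf (uf.parent.getD x x) hsz hcl hpxlt hbpx
      obtain ⟨res, hresdef⟩ : ∃ res, res = ufFind fuel uf (uf.parent.getD x x) := ⟨_, rfl⟩
      rw [← hresdef] at ihn ihsz ihrank ihcount ihcl ihroot ihreach ihriff ihreachiff hres
      have hreachx : ReachF (pfUF uf) x res.2 := reach_cons (by rw [hfx]; exact ihreach)
      have hrlt : res.2 < n := reach_lt hcl hx hreachx
      have hxr : x ≠ res.2 := by
        intro h
        rw [← h] at ihroot
        exact hxp' ihroot
      have hpf2 : pfUF ({ res.1 with parent := res.1.parent.setIfInBounds x res.2 } : UF) =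
          updF (pfUF res.1) x res.2 := pf_set res.1 x res.2 (by rw [ihsz]; exact hx)
      have hroot1 : IsRootF (pfUF res.1) res.2 := (ihriff res.2).2 ihroot
      have hreach1 : ReachF (pfUF res.1) x res.2 := (ihreachiff x res.2 ihroot).2 hreachx
      obtain ⟨criff, creach⟩ := updF_compress hroot1 hreach1 hxr
      rw [hres]
      refine ⟨ihn, ?_, ihrank, ihcount, ?_, ihroot, hreachx, ?_, ?_⟩
      · simp only [Array.size_setIfInBounds]; exact ihsz
      · intro y hy
        rw [hpf2]
        simp only [updF]
        by_cases h : y = x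
        · simp [h, hrlt]
        · simp only [if_neg h]; exact ihcl y hy
      · intro r'
        rw [hpf2]
        exact (criff r').trans (ihriff r')
      · intro z r' hr'
        rw [hpf2]
        exact (creach z r' ((ihriff r').2 hr')).trans (ihreachiff z r' hr')
    · have hxeq : x = uf.parent.getD x x := by
        by_contra h; exact hxp h
      have hres : ufFind (fuel + 1) uf x = (uf, x) := by
        have h0 : ufFind (fuel + 1) uf x =
            (if x ≠ uf.parent.getD x x then
              ({ (ufFind fuel uf (uf.parent.getD x x)).1 with
                 parent := (ufFind fuel uf (uf.parent.getD x x)).1.parent.setIfInBounds x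
                   (ufFind fuel uf (uf.parent.getD x x)).2 },
               (ufFind fuel uf (uf.parent.getD x x)).2)
            else (uf, x)) := rfl
        rw [h0, if_neg hxp]
      rw [hres]
      have hroot : IsRootF (pfUF uf) x := by
        simp only [IsRootF, pfUF]; exact hxeq.symm
      exact ⟨rfl, hsz, rfl, rfl, hcl, hroot, reach_refl _ x,
        fun _ => Iff.rfl, fun _ _ _ => Iff.rfl⟩

-- packaged version with fuel = uf.n
theorem ufFind_ok {n : Nat} (uf : UF) (x : Nat)
    (hn : uf.n = n) (hsz : uf.parent.size = n)
    (hcl : ∀ y, y < n → pfUF uf y < n)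
    (hroots : ∀ z, z < n → ∃ r, IsRootF (pfUF uf) r ∧ ReachF (pfUF uf) z r)
    (hx : x < n) :
    (ufFind uf.n uf x).1.n = n ∧ (ufFind uf.n uf x).1.parent.size = n ∧
    (ufFind uf.n uf x).1.rank = uf.rank ∧
    (∀ y, y < n → pfUF (ufFind uf.n uf x).1 y < n) ∧
    (∀ z, z < n → ∃ r, IsRootF (pfUF (ufFind uf.n uf x).1) r ∧ ReachF (pfUF (ufFind uf.n uf x).1) z r) ∧
    IsRootF (pfUF uf) (ufFind uf.n uf x).2 ∧ ReachF (pfUF uf) x (ufFind uf.n uf x).2 ∧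
    (ufFind uf.n uf x).2 < n ∧
    (∀ r', IsRootF (pfUF (ufFind uf.n uf x).1) r' ↔ IsRootF (pfUF uf) r') ∧
    (∀ z r', IsRootF (pfUF uf) r' → (ReachF (pfUF (ufFind uf.n uf x).1) z r' ↔ ReachF (pfUF uf) z r')) ∧
    (∀ a b, connF (pfUF (ufFind uf.n uf x).1) a b ↔ connF (pfUF uf) a b) := by
  have hb : ∃ k, k ≤ uf.n ∧ IsRootF (pfUF uf) (iterF (pfUF uf) k x) := by
    obtain ⟨r, hr, k, hk⟩ := hroots x hx
    obtain ⟨k2, hk2, hroot2⟩ := reach_bound hcl hx ⟨k, by rw [hk]; exact hr⟩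
    exact ⟨k2, by omega, hroot2⟩
  obtain ⟨h1, h2, h3, h4, h5, h6, h7, h8, h9⟩ := ufFind_spec n uf.n uf x hsz hcl hx hb
  refine ⟨hn ▸ h1, h2, h3, h5, ?_, h6, h7, reach_lt hcl hx h7, h8, h9,
    fun a b => conn_transfer h8 h9 a b⟩
  intro z hz
  obtain ⟨r, hr, hreach⟩ := hroots z hz
  exact ⟨r, (h8 r).2 hr, (h9 z r hr).2 hreach⟩

theorem pf_init (n : Nat) : ∀ y, pfUF (ufInit n) y = y := by
  intro y
  simp only [pfUF, ufInit, Array.getD, Array.size_range]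
  split
  · exact Array.getElem_range _
  · rfl

theorem iterF_of_id {f : Nat → Nat} (hf : ∀ y, f y = y) (k x : Nat) : iterF f k x = x := by
  induction k with
  | zero => rfl
  | succ k ih => simp only [iterF, hf]; exact ih

theorem invr_init (n : Nat) : InvR n (ufInit n) [] := by
  refine ⟨rfl, Array.size_range, ?_, ?_, ⟨by simp, by simp⟩, ?_⟩
  · intro y hy; rw [pf_init]; exact hy
  · intro x hx
    exact ⟨x, by simp [IsRootF, pf_init], reach_refl _ x⟩
  · intro x y hx hy
    simp only [inSame, List.not_mem_nil, false_and, exists_const, or_false]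
    constructor
    · rintro ⟨r, hr, ⟨k1, hk1⟩, ⟨k2, hk2⟩⟩
      rw [iterF_of_id (pf_init n)] at hk1 hk2
      exact hk1.trans hk2.symm
    · rintro rfl
      exact ⟨x, by simp [IsRootF, pf_init], reach_refl _ x, reach_refl _ x⟩
  -- note: inSame [] x y is False
-- ===== partition-side lemmas =====

theorem locateG_some {gs : List (List Nat)} {x : Nat} {g : List Nat}
    (h : locateG gs x = some g) : g ∈ gs ∧ x ∈ g := by
  refine ⟨List.mem_of_find?_eq_some h, ?_⟩
  have := List.find?_some h
  simpa using this

theorem locateG_none {gs : List (List Nat)} {x : Nat} :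
    locateG gs x = none ↔ ∀ g ∈ gs, x ∉ g := by
  simp [locateG, List.find?_eq_none]

theorem locateG_of_mem {gs : List (List Nat)} {x : Nat} {g : List Nat}
    (hpw : gs.Pairwise (fun g h => ∀ v, v ∈ g → v ∉ h))
    (hg : g ∈ gs) (hx : x ∈ g) : locateG gs x = some g := by
  induction gs with
  | nil => cases hg
  | cons a gs ih =>
    rcases List.mem_cons.1 hg with h | h
    · subst h
      exact List.find?_cons_of_pos (by simpa using hx)
    · have hnotx : x ∉ a := by
        intro hxa
        exact (List.pairwise_cons.1 hpw).1 g h x hxa hx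
      have hstep := List.find?_cons_of_neg (l := gs) (a := a)
        (p := fun g => decide (x ∈ g)) (by simpa using hnotx)
      show List.find? (fun g => decide (x ∈ g)) (a :: gs) = some g
      rw [hstep]
      exact ih (List.pairwise_cons.1 hpw).2 h

theorem inSame_iff_mem {gs : List (List Nat)} {u : Nat} {gu : List Nat}
    (hpw : gs.Pairwise (fun g h => ∀ v, v ∈ g → v ∉ h))
    (hgu : gu ∈ gs) (hu : u ∈ gu) :
    ∀ y, inSame gs u y ↔ y ∈ gu := by
  intro y
  constructor
  · rintro ⟨g, hg, hug, hyg⟩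
    have := locateG_of_mem hpw hg hug
    rw [locateG_of_mem hpw hgu hu] at this
    cases this
    exact hyg
  · intro hy
    exact ⟨gu, hgu, hu, hy⟩

theorem inSame_symm {gs : List (List Nat)} {x y : Nat} (h : inSame gs x y) : inSame gs y x := by
  obtain ⟨g, hg, h1, h2⟩ := h
  exact ⟨g, hg, h2, h1⟩

theorem notInSame_of_locate_none {gs : List (List Nat)} {u : Nat}
    (h : locateG gs u = none) : ∀ y, ¬ inSame gs u y := by
  rintro y ⟨g, hg, hug, -⟩
  exact (locateG_none.1 h) g hg hug

theorem togetherG_iff {gs : List (List Nat)} {u v : Nat}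
    (hpw : gs.Pairwise (fun g h => ∀ v, v ∈ g → v ∉ h)) :
    togetherG gs u v = true ↔ (u = v ∨ inSame gs u v) := by
  by_cases huv : u = v
  · simp [togetherG, huv]
  · simp only [togetherG, if_neg huv]
    cases hloc : locateG gs u with
    | none =>
      simp only [Bool.false_eq_true, false_iff]
      rintro (h | h)
      · exact huv h
      · exact notInSame_of_locate_none hloc v h
    | some gu =>
      obtain ⟨hgu, hu⟩ := locateG_some hloc
      rw [inSame_iff_mem hpw hgu hu v]
      simp [huv]

-- ===== conn-side helpers =====

theorem conn_root_char {f : Nat → Nat} {u ru : Nat}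
    (hru : IsRootF f ru) (hreach : ReachF f u ru) :
    ∀ z, connF f z u ↔ ReachF f z ru := by
  intro z
  constructor
  · rintro ⟨r, hr, hzr, hur⟩
    have : r = ru := reach_unique hr hru hur hreach
    exact this ▸ hzr
  · intro h
    exact ⟨ru, hru, h, hreach⟩

-- connectivity after linking two distinct roots a b
theorem conn_link {f : Nat → Nat} {a b : Nat}
    (ha : IsRootF f a) (hb : IsRootF f b) (hab : a ≠ b) :
    ∀ x y, connF (updF f a b) x y ↔
      (connF f x y ∨ (ReachF f x a ∧ ReachF f y b) ∨ (ReachF f x b ∧ ReachF f y a)) := by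
  obtain ⟨hriff, hr1, hr2, hr3⟩ := updF_link ha hb hab
  intro x y
  constructor
  · rintro ⟨r, hr, hxr, hyr⟩
    rcases hr3 x r hxr hr with hx' | ⟨hb1, hx'⟩
    · rcases hr3 y r hyr hr with hy' | ⟨hb2, hy'⟩
      · exact Or.inl ⟨r, ((hriff r).1 hr).1, hx', hy'⟩
      · exact Or.inr (Or.inr ⟨hb2 ▸ hx', hy'⟩)
    · rcases hr3 y r hyr hr with hy' | ⟨hb2, hy'⟩
      · exact Or.inr (Or.inl ⟨hx', hb1 ▸ hy'⟩)
      · exact Or.inl ⟨a, ha, hx', hy'⟩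
  · rintro (⟨r, hr, hxr, hyr⟩ | ⟨hx', hy'⟩ | ⟨hx', hy'⟩)
    · by_cases hra : r = a
      · subst hra
        exact ⟨b, (hriff b).2 ⟨hb, Ne.symm hab⟩, hr2 x hxr, hr2 y hyr⟩
      · exact ⟨r, (hriff r).2 ⟨hr, hra⟩, hr1 x r hr hra hxr, hr1 y r hr hra hyr⟩
    · exact ⟨b, (hriff b).2 ⟨hb, Ne.symm hab⟩, hr2 x hx',
        hr1 y b hb (Ne.symm hab) hy'⟩
    · exact ⟨b, (hriff b).2 ⟨hb, Ne.symm hab⟩, hr1 x b hb (Ne.symm hab) hx', hr2 y hy'⟩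
def linkUF (uf2 : UF) (p : Nat × Nat) : UF :=
  { uf2 with count := uf2.count - 1,
             parent := uf2.parent.setIfInBounds p.1 p.2,
             rank := uf2.rank.setIfInBounds p.2 (uf2.rank.getD p.2 0 + uf2.rank.getD p.1 0) }

-- ===== merge characterizations =====

theorem pairwise_disj_of_mem {gs : List (List Nat)} {g h : List Nat}
    (hpw : gs.Pairwise (fun g h => ∀ v, v ∈ g → v ∉ h))
    (hg : g ∈ gs) (hh : h ∈ gs) (hne : g ≠ h) : ∀ w ∈ g, w ∉ h := by
  induction gs with
  | nil => cases hg
  | cons a t ih =>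
    obtain ⟨hhead, htail⟩ := List.pairwise_cons.1 hpw
    rcases List.mem_cons.1 hg with hga | hgt
    · rcases List.mem_cons.1 hh with hha | hht
      · exact absurd (hga.trans hha.symm) hne
      · subst hga; exact fun w hw => hhead h hht w hw
    · rcases List.mem_cons.1 hh with hha | hht
      · subst hha
        intro w hw hwh
        exact hhead g hgt w hwh hw
      · exact ih htail hgt hht

theorem inSame_merge_nn {gs : List (List Nat)} {u v : Nat}
    (hu : ∀ g ∈ gs, u ∉ g) (hv : ∀ g ∈ gs, v ∉ g) :
    ∀ x y, inSame (gs ++ [[u, v]]) x y ↔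
      (inSame gs x y ∨ ((x = u ∨ x = v) ∧ (y = u ∨ y = v))) := by
  intro x y
  constructor
  · rintro ⟨g, hg, hx, hy⟩
    rcases List.mem_append.1 hg with h | h
    · exact Or.inl ⟨g, h, hx, hy⟩
    · have hg' : g = [u, v] := by simpa using h
      subst hg'
      exact Or.inr ⟨by simpa using hx, by simpa using hy⟩
  · rintro (⟨g, hg, hx, hy⟩ | ⟨hx, hy⟩)
    · exact ⟨g, List.mem_append.2 (Or.inl hg), hx, hy⟩
    · refine ⟨[u, v], List.mem_append.2 (Or.inr (by simp)), ?_, ?_⟩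
      · rcases hx with h | h <;> simp [h]
      · rcases hy with h | h <;> simp [h]

theorem inSame_merge_replace {gs : List (List Nat)} {u : Nat} {gv : List Nat}
    (hpw : gs.Pairwise (fun g h => ∀ v, v ∈ g → v ∉ h))
    (hgv : gv ∈ gs) (hu : ∀ g ∈ gs, u ∉ g) :
    ∀ x y, inSame (gs.map (fun g => if g = gv then g ++ [u] else g)) x y ↔
      (inSame gs x y ∨ ((x ∈ gv ∨ x = u) ∧ (y ∈ gv ∨ y = u))) := by
  intro x y
  constructor
  · rintro ⟨g', hg', hx, hy⟩
    obtain ⟨g, hg, rfl⟩ := List.mem_map.1 hg'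
    by_cases h : g = gv
    · rw [if_pos h] at hx hy
      subst h
      refine Or.inr ⟨?_, ?_⟩
      · rcases List.mem_append.1 hx with h' | h'
        · exact Or.inl h'
        · exact Or.inr (by simpa using h')
      · rcases List.mem_append.1 hy with h' | h'
        · exact Or.inl h'
        · exact Or.inr (by simpa using h')
    · rw [if_neg h] at hx hy
      exact Or.inl ⟨g, hg, hx, hy⟩
  · rintro (⟨g, hg, hx, hy⟩ | ⟨hx, hy⟩)
    · by_cases h : g = gv
      · subst h
        refine ⟨g ++ [u], List.mem_map.2 ⟨g, hg, by rw [if_pos rfl]⟩, ?_, ?_⟩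
        · exact List.mem_append.2 (Or.inl hx)
        · exact List.mem_append.2 (Or.inl hy)
      · exact ⟨g, List.mem_map.2 ⟨g, hg, by rw [if_neg h]⟩, hx, hy⟩
    · refine ⟨gv ++ [u], List.mem_map.2 ⟨gv, hgv, by rw [if_pos rfl]⟩, ?_, ?_⟩
      · rcases hx with h | h
        · exact List.mem_append.2 (Or.inl h)
        · exact List.mem_append.2 (Or.inr (by simp [h]))
      · rcases hy with h | h
        · exact List.mem_append.2 (Or.inl h)
        · exact List.mem_append.2 (Or.inr (by simp [h]))

theorem inSame_merge_concat {gs : List (List Nat)} {gu gv : List Nat}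
    (hpw : gs.Pairwise (fun g h => ∀ v, v ∈ g → v ∉ h)) :
    ∀ x y, inSame ((gs.filter (fun g => g ≠ gu ∧ g ≠ gv)) ++ [gu ++ gv]) x y ↔
      ((∃ g ∈ gs, (g ≠ gu ∧ g ≠ gv) ∧ x ∈ g ∧ y ∈ g) ∨
        ((x ∈ gu ∨ x ∈ gv) ∧ (y ∈ gu ∨ y ∈ gv))) := by
  intro x y
  constructor
  · rintro ⟨g, hg, hx, hy⟩
    rcases List.mem_append.1 hg with h | h
    · obtain ⟨hgmem, hcond⟩ := List.mem_filter.1 h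
      refine Or.inl ⟨g, hgmem, by simpa using hcond, hx, hy⟩
    · have hg' : g = gu ++ gv := by simpa using h
      subst hg'
      exact Or.inr ⟨List.mem_append.1 hx, List.mem_append.1 hy⟩
  · rintro (⟨g, hg, hcond, hx, hy⟩ | ⟨hx, hy⟩)
    · refine ⟨g, List.mem_append.2 (Or.inl (List.mem_filter.2 ⟨hg, by simpa using hcond⟩)), hx, hy⟩
    · refine ⟨gu ++ gv, List.mem_append.2 (Or.inr (by simp)), List.mem_append.2 hx, List.mem_append.2 hy⟩

theorem inSame_split {gs : List (List Nat)} {gu gv : List Nat}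
    (hpw : gs.Pairwise (fun g h => ∀ v, v ∈ g → v ∉ h))
    (hgu : gu ∈ gs) (hgv : gv ∈ gs) :
    ∀ x y, inSame gs x y ↔
      ((∃ g ∈ gs, (g ≠ gu ∧ g ≠ gv) ∧ x ∈ g ∧ y ∈ g) ∨ (x ∈ gu ∧ y ∈ gu) ∨ (x ∈ gv ∧ y ∈ gv)) := by
  intro x y
  constructor
  · rintro ⟨g, hg, hx, hy⟩
    by_cases h1 : g = gu
    · exact Or.inr (Or.inl ⟨h1 ▸ hx, h1 ▸ hy⟩)
    · by_cases h2 : g = gv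
      · exact Or.inr (Or.inr ⟨h2 ▸ hx, h2 ▸ hy⟩)
      · exact Or.inl ⟨g, hg, ⟨h1, h2⟩, hx, hy⟩
  · rintro (⟨g, hg, -, hx, hy⟩ | ⟨hx, hy⟩ | ⟨hx, hy⟩)
    · exact ⟨g, hg, hx, hy⟩
    · exact ⟨gu, hgu, hx, hy⟩
    · exact ⟨gv, hgv, hx, hy⟩

-- ===== GInv preservation =====

theorem ginv_nn {n : Nat} {gs : List (List Nat)} {u v : Nat} (hG : GInv n gs)
    (hun : u < n) (hvn : v < n) (hu : ∀ g ∈ gs, u ∉ g) (hv : ∀ g ∈ gs, v ∉ g) :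
    GInv n (gs ++ [[u, v]]) := by
  obtain ⟨hmem, hpw⟩ := hG
  constructor
  · intro g hg
    rcases List.mem_append.1 hg with h | h
    · exact hmem g h
    · have : g = [u, v] := by simpa using h
      subst this
      refine ⟨by simp, ?_⟩
      intro w hw
      rcases by simpa using hw with h | h <;> (subst h; assumption)
  · rw [List.pairwise_append]
    refine ⟨hpw, by simp, ?_⟩
    intro g hg g' hg'
    have : g' = [u, v] := by simpa using hg'
    subst this
    intro w hw hw'
    rcases by simpa using hw' with h | h
    · subst h; exact hu g hg hw
    · subst h; exact hv g hg hw

theorem ginv_replace {n : Nat} {gs : List (List Nat)} {u : Nat} {gv : List Nat} (hG : GInv n gs)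
    (hun : u < n) (hgv : gv ∈ gs) (hu : ∀ g ∈ gs, u ∉ g) :
    GInv n (gs.map (fun g => if g = gv then g ++ [u] else g)) := by
  obtain ⟨hmem, hpw⟩ := hG
  constructor
  · intro g' hg'
    obtain ⟨g, hg, rfl⟩ := List.mem_map.1 hg'
    by_cases h : g = gv
    · rw [if_pos h]
      subst h
      refine ⟨by simp [(hmem g hg).1], ?_⟩
      intro w hw
      rcases List.mem_append.1 hw with h' | h'
      · exact (hmem g hg).2 w h'
      · have : w = u := by simpa using h'
        subst this; exact hun
    · rw [if_neg h]
      exact hmem g hg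
  · rw [List.pairwise_map]
    refine hpw.imp_of_mem ?_
    intro g g' hg hg' hdisj
    intro w hw
    by_cases h : g = gv
    · rw [if_pos h] at hw
      by_cases h' : g' = gv
      · -- both equal gv: gv disjoint from itself, yet nonempty: impossible
        exfalso
        obtain ⟨hne, -⟩ := hmem gv hgv
        cases hgvc : gv with
        | nil => exact hne hgvc
        | cons a t =>
          have ha : a ∈ g := by rw [h, hgvc]; simp
          have ha' := hdisj a ha
          rw [h', hgvc] at ha'
          exact ha' (by simp)
      · rw [if_neg h']
        rcases List.mem_append.1 hw with h2 | h2
        · exact hdisj w h2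
        · have : w = u := by simpa using h2
          subst this
          exact hu g' hg'
    · rw [if_neg h] at hw
      by_cases h' : g' = gv
      · rw [if_pos h']
        intro hcontra
        rcases List.mem_append.1 hcontra with h2 | h2
        · exact hdisj w hw (h'.symm ▸ h2)
        · have : w = u := by simpa using h2
          subst this
          exact hu g hg hw
      · rw [if_neg h']
        exact hdisj w hw

theorem ginv_concat {n : Nat} {gs : List (List Nat)} {gu gv : List Nat} (hG : GInv n gs)
    (hgu : gu ∈ gs) (hgv : gv ∈ gs) (hne : gu ≠ gv) :
    GInv n ((gs.filter (fun g => g ≠ gu ∧ g ≠ gv)) ++ [gu ++ gv]) := by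
  obtain ⟨hmem, hpw⟩ := hG
  constructor
  · intro g hg
    rcases List.mem_append.1 hg with h | h
    · exact hmem g (List.mem_filter.1 h).1
    · have : g = gu ++ gv := by simpa using h
      subst this
      refine ⟨?_, ?_⟩
      · have := (hmem gu hgu).1
        intro hx
        rw [List.append_eq_nil_iff] at hx
        exact this hx.1
      · intro w hw
        rcases List.mem_append.1 hw with h' | h'
        · exact (hmem gu hgu).2 w h'
        · exact (hmem gv hgv).2 w h'
  · rw [List.pairwise_append]
    refine ⟨hpw.sublist List.filter_sublist, by simp, ?_⟩
    intro g hg g' hg'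
    have hgmem := (List.mem_filter.1 hg).1
    have hcond := (List.mem_filter.1 hg).2
    have hcond' : g ≠ gu ∧ g ≠ gv := by simpa using hcond
    have : g' = gu ++ gv := by simpa using hg'
    subst this
    intro w hw hcontra
    rcases List.mem_append.1 hcontra with h2 | h2
    · exact pairwise_disj_of_mem hpw hgmem hgu hcond'.1 w hw h2
    · exact pairwise_disj_of_mem hpw hgmem hgv hcond'.2 w hw h2
theorem inSame_comm {gs : List (List Nat)} {x y : Nat} : inSame gs x y ↔ inSame gs y x :=
  ⟨inSame_symm, inSame_symm⟩

theorem relstep_combinatorial {gs : List (List Nat)} {u v : Nat}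
    (hpw : gs.Pairwise (fun g h => ∀ w, w ∈ g → w ∉ h))
    (hnins : ¬ inSame gs u v) :
    ∀ x y,
      ((x = y ∨ inSame gs x y) ∨ ((x = u ∨ inSame gs x u) ∧ (y = v ∨ inSame gs y v)) ∨
        ((x = v ∨ inSame gs x v) ∧ (y = u ∨ inSame gs y u)))
      ↔ (x = y ∨ inSame (mergeG gs u v) x y) := by
  intro x y
  cases hlocu : locateG gs u with
  | none =>
    have hfu : ∀ z, ¬ inSame gs z u := fun z h => notInSame_of_locate_none hlocu z (inSame_symm h)
    cases hlocv : locateG gs v with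
    | none =>
      have hfv : ∀ z, ¬ inSame gs z v := fun z h => notInSame_of_locate_none hlocv z (inSame_symm h)
      have hmerge : mergeG gs u v = gs ++ [[u, v]] := by simp [mergeG, hlocu, hlocv]
      rw [hmerge, inSame_merge_nn (locateG_none.1 hlocu) (locateG_none.1 hlocv) x y]
      constructor
      · rintro ((h | h) | ⟨h1, h2⟩ | ⟨h1, h2⟩)
        · exact Or.inl h
        · exact Or.inr (Or.inl h)
        · rcases h1 with h1 | h1
          · rcases h2 with h2 | h2
            · exact Or.inr (Or.inr ⟨Or.inl h1, Or.inr h2⟩)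
            · exact absurd h2 (hfv y)
          · exact absurd h1 (hfu x)
        · rcases h1 with h1 | h1
          · rcases h2 with h2 | h2
            · exact Or.inr (Or.inr ⟨Or.inr h1, Or.inl h2⟩)
            · exact absurd h2 (hfu y)
          · exact absurd h1 (hfv x)
      · rintro (h | h | ⟨hx, hy⟩)
        · exact Or.inl (Or.inl h)
        · exact Or.inl (Or.inr h)
        · rcases hx with hx | hx <;> rcases hy with hy | hy
          · exact Or.inl (Or.inl (hx.trans hy.symm))
          · exact Or.inr (Or.inl ⟨Or.inl hx, Or.inl hy⟩)
          · exact Or.inr (Or.inr ⟨Or.inl hx, Or.inl hy⟩)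
          · exact Or.inl (Or.inl (hx.trans hy.symm))
    | some gv =>
      have hgv := (locateG_some hlocv).1
      have hvgv := (locateG_some hlocv).2
      have hzv : ∀ z, inSame gs z v ↔ z ∈ gv :=
        fun z => inSame_comm.trans (inSame_iff_mem hpw hgv hvgv z)
      have hfu : ∀ z, ¬ inSame gs z u := fun z h => notInSame_of_locate_none hlocu z (inSame_symm h)
      have hmerge : mergeG gs u v = gs.map (fun g => if g = gv then g ++ [u] else g) := by
        simp [mergeG, hlocu, hlocv]
      rw [hmerge, inSame_merge_replace hpw hgv (locateG_none.1 hlocu) x y]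
      constructor
      · rintro ((h | h) | ⟨h1, h2⟩ | ⟨h1, h2⟩)
        · exact Or.inl h
        · exact Or.inr (Or.inl h)
        · rcases h1 with h1 | h1
          · rcases h2 with h2 | h2
            · exact Or.inr (Or.inr ⟨Or.inr h1, Or.inl (h2.symm ▸ hvgv)⟩)
            · exact Or.inr (Or.inr ⟨Or.inr h1, Or.inl ((hzv y).1 h2)⟩)
          · exact absurd h1 (hfu x)
        · rcases h2 with h2 | h2
          · rcases h1 with h1 | h1
            · exact Or.inr (Or.inr ⟨Or.inl (h1.symm ▸ hvgv), Or.inr h2⟩)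
            · exact Or.inr (Or.inr ⟨Or.inl ((hzv x).1 h1), Or.inr h2⟩)
          · exact absurd h2 (hfu y)
      · rintro (h | h | ⟨hx, hy⟩)
        · exact Or.inl (Or.inl h)
        · exact Or.inl (Or.inr h)
        · rcases hx with hx | hx <;> rcases hy with hy | hy
          · exact Or.inl (Or.inr ⟨gv, hgv, hx, hy⟩)
          · exact Or.inr (Or.inr ⟨Or.inr ((hzv x).2 hx), Or.inl hy⟩)
          · exact Or.inr (Or.inl ⟨Or.inl hx, Or.inr ((hzv y).2 hy)⟩)
          · exact Or.inl (Or.inl (hx.trans hy.symm))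
  | some gu =>
    have hgu := (locateG_some hlocu).1
    have hugu := (locateG_some hlocu).2
    have hzu : ∀ z, inSame gs z u ↔ z ∈ gu :=
      fun z => inSame_comm.trans (inSame_iff_mem hpw hgu hugu z)
    cases hlocv : locateG gs v with
    | none =>
      have hfv : ∀ z, ¬ inSame gs z v := fun z h => notInSame_of_locate_none hlocv z (inSame_symm h)
      have hmerge : mergeG gs u v = gs.map (fun g => if g = gu then g ++ [v] else g) := by
        simp [mergeG, hlocu, hlocv]
      rw [hmerge, inSame_merge_replace hpw hgu (locateG_none.1 hlocv) x y]
      constructor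
      · rintro ((h | h) | ⟨h1, h2⟩ | ⟨h1, h2⟩)
        · exact Or.inl h
        · exact Or.inr (Or.inl h)
        · rcases h2 with h2 | h2
          · rcases h1 with h1 | h1
            · exact Or.inr (Or.inr ⟨Or.inl (h1.symm ▸ hugu), Or.inr h2⟩)
            · exact Or.inr (Or.inr ⟨Or.inl ((hzu x).1 h1), Or.inr h2⟩)
          · exact absurd h2 (hfv y)
        · rcases h1 with h1 | h1
          · rcases h2 with h2 | h2
            · exact Or.inr (Or.inr ⟨Or.inr h1, Or.inl (h2.symm ▸ hugu)⟩)
            · exact Or.inr (Or.inr ⟨Or.inr h1, Or.inl ((hzu y).1 h2)⟩)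
          · exact absurd h1 (hfv x)
      · rintro (h | h | ⟨hx, hy⟩)
        · exact Or.inl (Or.inl h)
        · exact Or.inl (Or.inr h)
        · rcases hx with hx | hx <;> rcases hy with hy | hy
          · exact Or.inl (Or.inr ⟨gu, hgu, hx, hy⟩)
          · exact Or.inr (Or.inl ⟨Or.inr ((hzu x).2 hx), Or.inl hy⟩)
          · exact Or.inr (Or.inr ⟨Or.inl hx, Or.inr ((hzu y).2 hy)⟩)
          · exact Or.inl (Or.inl (hx.trans hy.symm))
    | some gv =>
      have hgv := (locateG_some hlocv).1
      have hvgv := (locateG_some hlocv).2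
      have hzv : ∀ z, inSame gs z v ↔ z ∈ gv :=
        fun z => inSame_comm.trans (inSame_iff_mem hpw hgv hvgv z)
      have hgugv : gu ≠ gv := by
        intro h
        exact hnins ⟨gv, hgv, h ▸ hugu, hvgv⟩
      have hmerge : mergeG gs u v = (gs.filter (fun g => g ≠ gu ∧ g ≠ gv)) ++ [gu ++ gv] := by
        simp [mergeG, hlocu, hlocv, hgugv]
      rw [hmerge, inSame_merge_concat hpw x y]
      have hsplit := inSame_split hpw hgu hgv x y
      constructor
      · rintro ((h | h) | ⟨h1, h2⟩ | ⟨h1, h2⟩)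
        · exact Or.inl h
        · rcases hsplit.1 h with h | ⟨hx, hy⟩ | ⟨hx, hy⟩
          · exact Or.inr (Or.inl h)
          · exact Or.inr (Or.inr ⟨Or.inl hx, Or.inl hy⟩)
          · exact Or.inr (Or.inr ⟨Or.inr hx, Or.inr hy⟩)
        · have hxgu : x ∈ gu := by
            rcases h1 with h1 | h1
            · exact h1.symm ▸ hugu
            · exact (hzu x).1 h1
          have hygv : y ∈ gv := by
            rcases h2 with h2 | h2
            · exact h2.symm ▸ hvgv
            · exact (hzv y).1 h2
          exact Or.inr (Or.inr ⟨Or.inl hxgu, Or.inr hygv⟩)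
        · have hxgv : x ∈ gv := by
            rcases h1 with h1 | h1
            · exact h1.symm ▸ hvgv
            · exact (hzv x).1 h1
          have hygu : y ∈ gu := by
            rcases h2 with h2 | h2
            · exact h2.symm ▸ hugu
            · exact (hzu y).1 h2
          exact Or.inr (Or.inr ⟨Or.inr hxgv, Or.inl hygu⟩)
      · rintro (h | h | ⟨hx, hy⟩)
        · exact Or.inl (Or.inl h)
        · exact Or.inl (Or.inr (hsplit.2 (Or.inl h)))
        · rcases hx with hx | hx <;> rcases hy with hy | hy
          · exact Or.inl (Or.inr (hsplit.2 (Or.inr (Or.inl ⟨hx, hy⟩))))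
          · exact Or.inr (Or.inl ⟨Or.inr ((hzu x).2 hx), Or.inr ((hzv y).2 hy)⟩)
          · exact Or.inr (Or.inr ⟨Or.inr ((hzv x).2 hx), Or.inr ((hzu y).2 hy)⟩)
          · exact Or.inl (Or.inr (hsplit.2 (Or.inr (Or.inr ⟨hx, hy⟩))))
-- merged connectivity in terms of conn to u and v
theorem conn_merged_rel {f : Nat → Nat} {u v ru rv : Nat}
    (hru : IsRootF f ru) (hrv : IsRootF f rv) (hne : ru ≠ rv)
    (hur : ReachF f u ru) (hvr : ReachF f v rv) {a b : Nat}
    (hab : (a = ru ∧ b = rv) ∨ (a = rv ∧ b = ru)) :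
    ∀ x y, connF (updF f a b) x y ↔
      (connF f x y ∨ (connF f x u ∧ connF f y v) ∨ (connF f x v ∧ connF f y u)) := by
  have hcu := conn_root_char hru hur
  have hcv := conn_root_char hrv hvr
  intro x y
  rcases hab with ⟨rfl, rfl⟩ | ⟨rfl, rfl⟩
  · rw [conn_link hru hrv hne x y, ← hcu x, ← hcu y, ← hcv x, ← hcv y]
  · rw [conn_link hrv hru (Ne.symm hne) x y, ← hcu x, ← hcu y, ← hcv x, ← hcv y]
    constructor
    · rintro (h | ⟨h1, h2⟩ | ⟨h1, h2⟩)
      · exact Or.inl h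
      · exact Or.inr (Or.inr ⟨h1, h2⟩)
      · exact Or.inr (Or.inl ⟨h1, h2⟩)
    · rintro (h | ⟨h1, h2⟩ | ⟨h1, h2⟩)
      · exact Or.inl h
      · exact Or.inr (Or.inr ⟨h1, h2⟩)
      · exact Or.inr (Or.inl ⟨h1, h2⟩)

-- the union/merge bisimulation step
theorem union_merge_step {n : Nat} {uf : UF} {gs : List (List Nat)} {u v : Nat}
    (hI : InvR n uf gs) (hu : u < n) (hv : v < n) (huv : u ≠ v) :
    InvR n (ufUnion uf u v).1 (mergeG gs u v) := by
  obtain ⟨hn, hsz, hcl, hroots, hG, hRel⟩ := hI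
  have hGpw := hG.2
  obtain ⟨f1n, f1sz, f1rank, f1cl, f1roots, hrootX, hreachX, hXlt, riff1, reachiff1, conniff1⟩ :=
    ufFind_ok (n := n) uf u hn hsz hcl hroots hu
  obtain ⟨f2n, f2sz, f2rank, f2cl, f2roots, hrootY1, hreachY1, hYlt, riff2, reachiff2, conniff2⟩ :=
    ufFind_ok (n := n) (ufFind uf.n uf u).1 v f1n f1sz f1cl f1roots hv
  -- names
  obtain ⟨R1, hR1⟩ : ∃ r, r = ufFind uf.n uf u := ⟨_, rfl⟩
  obtain ⟨R2, hR2⟩ : ∃ r, r = ufFind (ufFind uf.n uf u).1.n (ufFind uf.n uf u).1 v := ⟨_, rfl⟩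
  rw [← hR1] at f1n f1sz f1rank f1cl f1roots hrootX hreachX hXlt riff1 reachiff1 conniff1 f2n f2sz f2rank f2cl f2roots hrootY1 hreachY1 hYlt riff2 reachiff2 conniff2 hR2
  rw [← hR2] at f2n f2sz f2rank f2cl f2roots hrootY1 hreachY1 hYlt riff2 reachiff2 conniff2
  -- facts about rootY in the original function
  have hrootY : IsRootF (pfUF uf) R2.2 := (riff1 R2.2).1 hrootY1
  have hreachY : ReachF (pfUF uf) v R2.2 := (reachiff1 v R2.2 hrootY).1 hreachY1
  have conniff : ∀ x y, connF (pfUF R2.1) x y ↔ connF (pfUF uf) x y :=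
    fun x y => (conniff2 x y).trans (conniff1 x y)
  have hconn_uv : connF (pfUF uf) u v ↔ R1.2 = R2.2 := by
    constructor
    · rintro ⟨r, hr, h1, h2⟩
      have e1 : r = R1.2 := reach_unique hr hrootX h1 hreachX
      have e2 : r = R2.2 := reach_unique hr hrootY h2 hreachY
      rw [← e1, ← e2]
    · intro h
      exact ⟨R1.2, hrootX, hreachX, h ▸ hreachY⟩
  have hunion : ufUnion uf u v =
      (if R1.2 = R2.2 then (R2.1, false)
       else (linkUF R2.1 (if R2.1.rank.getD R1.2 0 > R2.1.rank.getD R2.2 0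
              then (R2.2, R1.2) else (R1.2, R2.2)), true)) := by
    rw [hR2, hR1]
    rfl
  by_cases heq : R1.2 = R2.2
  · -- already connected: no union, no merge
    rw [hunion, if_pos heq]
    have hins : inSame gs u v := by
      rcases (hRel u v hu hv).1 (hconn_uv.2 heq) with he | hs
      · exact absurd he huv
      · exact hs
    obtain ⟨g, hg, hug, hvg⟩ := hins
    have hlocu : locateG gs u = some g := locateG_of_mem hGpw hg hug
    have hlocv : locateG gs v = some g := locateG_of_mem hGpw hg hvg
    have hmerge : mergeG gs u v = gs := by
      simp [mergeG, hlocu, hlocv]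
    rw [hmerge]
    exact ⟨f2n, f2sz, f2cl, f2roots, hG, fun x y hx hy => (conniff x y).trans (hRel x y hx hy)⟩
  · -- link the two roots; merge the two classes
    rw [hunion, if_neg heq]
    have hnconn : ¬ connF (pfUF uf) u v := fun h => heq (hconn_uv.1 h)
    have hnins : ¬ inSame gs u v := by
      intro h
      exact hnconn ((hRel u v hu hv).2 (Or.inr h))
    -- the pair that actually gets linked
    obtain ⟨a, b, hab, hpair⟩ :
        ∃ a b, ((a = R1.2 ∧ b = R2.2) ∨ (a = R2.2 ∧ b = R1.2)) ∧
          (if R2.1.rank.getD R1.2 0 > R2.1.rank.getD R2.2 0 then (R2.2, R1.2) else (R1.2, R2.2)) = (a, b) := by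
      by_cases h : R2.1.rank.getD R1.2 0 > R2.1.rank.getD R2.2 0
      · exact ⟨R2.2, R1.2, Or.inr ⟨rfl, rfl⟩, by rw [if_pos h]⟩
      · exact ⟨R1.2, R2.2, Or.inl ⟨rfl, rfl⟩, by rw [if_neg h]⟩
    rw [hpair]
    have halt : a < n ∧ b < n ∧ a ≠ b := by
      rcases hab with ⟨rfl, rfl⟩ | ⟨rfl, rfl⟩
      · exact ⟨hXlt, hYlt, heq⟩
      · exact ⟨hYlt, hXlt, Ne.symm heq⟩
    -- roots of pfUF R2.1
    have hrootX2 : IsRootF (pfUF R2.1) R1.2 := (riff2 R1.2).2 ((riff1 R1.2).2 hrootX)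
    have hrootY2 : IsRootF (pfUF R2.1) R2.2 := (riff2 R2.2).2 hrootY1
    have hreachX2 : ReachF (pfUF R2.1) u R1.2 :=
      (reachiff2 u R1.2 ((riff1 R1.2).2 hrootX)).2 ((reachiff1 u R1.2 hrootX).2 hreachX)
    have hreachY2 : ReachF (pfUF R2.1) v R2.2 :=
      (reachiff2 v R2.2 hrootY1).2 ((reachiff1 v R2.2 hrootY).2 hreachY)
    have hrootA : IsRootF (pfUF R2.1) a ∧ IsRootF (pfUF R2.1) b := by
      rcases hab with ⟨rfl, rfl⟩ | ⟨rfl, rfl⟩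
      · exact ⟨hrootX2, hrootY2⟩
      · exact ⟨hrootY2, hrootX2⟩
    have hpf3 : pfUF (linkUF R2.1 (a, b)) = updF (pfUF R2.1) a b := by
      have h1 : pfUF (linkUF R2.1 (a, b)) =
          pfUF ({ R2.1 with parent := R2.1.parent.setIfInBounds a b } : UF) := rfl
      rw [h1, pf_set R2.1 a b (by rw [f2sz]; exact halt.1)]
    have hconn3 : ∀ x y, connF (updF (pfUF R2.1) a b) x y ↔
        (connF (pfUF R2.1) x y ∨ (connF (pfUF R2.1) x u ∧ connF (pfUF R2.1) y v) ∨
          (connF (pfUF R2.1) x v ∧ connF (pfUF R2.1) y u)) :=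
      conn_merged_rel hrootX2 hrootY2 heq hreachX2 hreachY2 hab
    obtain ⟨hlink_riff, hlink_pres, hlink_ab, hlink_back⟩ := updF_link hrootA.1 hrootA.2 halt.2.2
    -- merge side
    refine ⟨f2n, ?_, ?_, ?_, ?_, ?_⟩
    · show (R2.1.parent.setIfInBounds a b).size = n
      rw [Array.size_setIfInBounds]
      exact f2sz
    · intro y hy
      rw [hpf3]
      simp only [updF]
      by_cases h : y = a
      · simp [h, halt.2.1]
      · simp only [if_neg h]; exact f2cl y hy
    · intro z hz
      rw [hpf3]
      obtain ⟨r, hr, hreach⟩ := f2roots z hz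
      by_cases hra : r = a
      · subst hra
        refine ⟨b, (hlink_riff b).2 ⟨hrootA.2, Ne.symm halt.2.2⟩, hlink_ab z hreach⟩
      · exact ⟨r, (hlink_riff r).2 ⟨hr, hra⟩, hlink_pres z r hr hra hreach⟩
    · -- GInv of the merged partition
      cases hlocu : locateG gs u with
      | none =>
        cases hlocv : locateG gs v with
        | none =>
          have hmerge : mergeG gs u v = gs ++ [[u, v]] := by simp [mergeG, hlocu, hlocv]
          rw [hmerge]
          exact ginv_nn hG hu hv (locateG_none.1 hlocu) (locateG_none.1 hlocv)
        | some gv =>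
          have hmerge : mergeG gs u v = gs.map (fun g => if g = gv then g ++ [u] else g) := by
            simp [mergeG, hlocu, hlocv]
          rw [hmerge]
          exact ginv_replace hG hu (locateG_some hlocv).1 (locateG_none.1 hlocu)
      | some gu =>
        cases hlocv : locateG gs v with
        | none =>
          have hmerge : mergeG gs u v = gs.map (fun g => if g = gu then g ++ [v] else g) := by
            simp [mergeG, hlocu, hlocv]
          rw [hmerge]
          exact ginv_replace hG hv (locateG_some hlocu).1 (locateG_none.1 hlocv)
        | some gv =>
          have hgugv : gu ≠ gv := by
            intro h
            exact hnins ⟨gv, (locateG_some hlocv).1, h ▸ (locateG_some hlocu).2, (locateG_some hlocv).2⟩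
          have hmerge : mergeG gs u v =
              (gs.filter (fun g => g ≠ gu ∧ g ≠ gv)) ++ [gu ++ gv] := by
            simp [mergeG, hlocu, hlocv, hgugv]
          rw [hmerge]
          exact ginv_concat hG (locateG_some hlocu).1 (locateG_some hlocv).1 hgugv
    · -- the relation equivalence
      intro x y hx hy
      rw [hpf3, hconn3 x y, conniff x y, conniff x u, conniff y v, conniff x v, conniff y u,
        hRel x y hx hy, hRel x u hx hu, hRel y v hy hv, hRel x v hx hv, hRel y u hy hu]
      -- now a purely combinatorial statement about the partition
      exact relstep_combinatorial hGpw hnins x y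
-- ===== generic parallel fold =====
theorem foldl_bisim {α β γ : Type} (R : α → β → Prop) (l : List γ) (fA : α → γ → α) (fB : β → γ → β)
    (h : ∀ c ∈ l, ∀ a b, R a b → R (fA a c) (fB b c)) :
    ∀ a b, R a b → R (l.foldl fA a) (l.foldl fB b) := by
  induction l with
  | nil => intro a b hr; exact hr
  | cons c l ih =>
    intro a b hr
    exact ih (fun c' hc' a' b' => h c' (by simp [hc']) a' b') _ _ (h c (by simp) a b hr)

-- ===== arithmetic helpers =====
theorem cell_lt (ROW COL r c : Nat) (hr : r < ROW) (hc : c < COL) :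
    r * COL + c < ROW * COL := by
  calc r * COL + c < r * COL + COL := by omega
    _ = (r + 1) * COL := by rw [Nat.succ_mul]
    _ ≤ ROW * COL := Nat.mul_le_mul_right COL hr

theorem encode_inj {COL r c r' c' : Nat} (hc : c < COL) (hc' : c' < COL)
    (h : r * COL + c = r' * COL + c') : r = r' ∧ c = c' := by
  rcases Nat.lt_trichotomy r r' with hlt | heq | hgt
  · exfalso
    have : r * COL + c < r' * COL + c' := by
      calc r * COL + c < r * COL + COL := by omega
        _ = (r + 1) * COL := by rw [Nat.succ_mul]
        _ ≤ r' * COL := Nat.mul_le_mul_right COL hlt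
        _ ≤ r' * COL + c' := by omega
    omega
  · constructor
    · exact heq
    · subst heq; omega
  · exfalso
    have : r' * COL + c' < r * COL + c := by
      calc r' * COL + c' < r' * COL + COL := by omega
        _ = (r' + 1) * COL := by rw [Nat.succ_mul]
        _ ≤ r * COL := Nat.mul_le_mul_right COL hgt
        _ ≤ r * COL + c := by omega
    omega

theorem dir8_nonzero : ∀ d ∈ DIR8L, ¬(d.1 = 0 ∧ d.2 = 0) := by decide

-- ===== phase 1 bisimulation =====
theorem phase1_invr (matrix : List (List Int)) (ROW COL : Nat) :
    InvR (ROW * COL + 10) (aPhase1 matrix ROW COL (ROW * COL + 5) (ROW * COL + 6))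
      (bPhase1 matrix ROW COL (ROW * COL + 5) (ROW * COL + 6)) := by
  have hM : ∀ {r c : Nat}, r < ROW → c < COL → r * COL + c < ROW * COL + 10 := by
    intro r c hr hc
    have := cell_lt ROW COL r c hr hc
    omega
  unfold aPhase1 bPhase1
  apply foldl_bisim (R := InvR (ROW * COL + 10))
  · intro r hrm a b hR
    have hr : r < ROW := List.mem_range.1 hrm
    apply foldl_bisim (R := InvR (ROW * COL + 10))
    · intro c hcm a' b' hR'
      have hc : c < COL := List.mem_range.1 hcm
      by_cases hobs : matGet matrix r c = 1
      · rw [if_pos hobs, if_pos hobs]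
        apply foldl_bisim (R := InvR (ROW * COL + 10))
        · intro d hdm a'' b'' hR''
          by_cases hin : 0 ≤ (r : Int) + d.1 ∧ (r : Int) + d.1 < (ROW : Int) ∧
              0 ≤ (c : Int) + d.2 ∧ (c : Int) + d.2 < (COL : Int)
          · rw [if_pos hin, if_pos hin]
            by_cases hnb : matGet matrix ((r : Int) + d.1).toNat ((c : Int) + d.2).toNat = 1
            · rw [if_pos hnb, if_pos hnb]
              have hnrlt : ((r : Int) + d.1).toNat < ROW := by omega
              have hnclt : ((c : Int) + d.2).toNat < COL := by omega
              refine union_merge_step hR'' (hM hr hc) (hM hnrlt hnclt) ?_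
              intro hcontra
              obtain ⟨h1, h2⟩ := encode_inj hc hnclt hcontra
              have hd := dir8_nonzero d hdm
              omega
            · rw [if_neg hnb, if_neg hnb]
              exact hR''
          · rw [if_neg hin, if_neg hin]
            by_cases hp1 : (r : Int) + d.1 < 0 ∨ (COL : Int) ≤ (c : Int) + d.2
            · rw [if_pos hp1, if_pos hp1]
              refine union_merge_step hR'' (hM hr hc) (by omega) ?_
              have := cell_lt ROW COL r c hr hc
              omega
            · rw [if_neg hp1, if_neg hp1]
              have hp2 : (ROW : Int) ≤ (r : Int) + d.1 ∨ (c : Int) + d.2 < 0 := by omega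
              rw [if_pos hp2]
              refine union_merge_step hR'' (hM hr hc) (by omega) ?_
              have := cell_lt ROW COL r c hr hc
              omega
        · exact hR'
      · rw [if_neg hobs, if_neg hobs]
        exact hR'
    · exact hR
  · exact invr_init (ROW * COL + 10)

-- ===== phase 2 infrastructure =====
def RootSame (f f' : Nat → Nat) : Prop :=
  (∀ r, IsRootF f' r ↔ IsRootF f r) ∧ (∀ z r, IsRootF f r → (ReachF f' z r ↔ ReachF f z r))

theorem rootsame_refl (f : Nat → Nat) : RootSame f f :=
  ⟨fun _ => Iff.rfl, fun _ _ _ => Iff.rfl⟩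

theorem rootsame_trans {f g h : Nat → Nat} (h1 : RootSame f g) (h2 : RootSame g h) :
    RootSame f h := by
  refine ⟨fun r => (h2.1 r).trans (h1.1 r), fun z r hr => ?_⟩
  exact ((h2.2 z r ((h1.1 r).2 hr)).trans (h1.2 z r hr))

def rootOfP (f : Nat → Nat) (z r : Nat) : Prop := IsRootF f r ∧ ReachF f z r

def P2Inv (n : Nat) (f0 : Nat → Nat) (uf : UF) : Prop :=
  uf.n = n ∧ uf.parent.size = n ∧ (∀ y, y < n → pfUF uf y < n) ∧
  (∀ z, z < n → ∃ r, rootOfP (pfUF uf) z r) ∧ RootSame f0 (pfUF uf)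

theorem p2_find {n : Nat} {f0 : Nat → Nat} {uf : UF} {x : Nat}
    (hP : P2Inv n f0 uf) (hx : x < n) :
    P2Inv n f0 (ufFind uf.n uf x).1 ∧ rootOfP f0 x (ufFind uf.n uf x).2 := by
  obtain ⟨hn, hsz, hcl, hroots, hRS⟩ := hP
  obtain ⟨h1, h2, h3, h4, h5, h6, h7, h8, h9, h10, h11⟩ :=
    ufFind_ok (n := n) uf x hn hsz hcl (fun z hz => hroots z hz) hx
  refine ⟨⟨h1, h2, h4, h5, rootsame_trans hRS ⟨h9, h10⟩⟩, ?_⟩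
  have hroot0 : IsRootF f0 (ufFind uf.n uf x).2 := (hRS.1 _).1 h6
  exact ⟨hroot0, (hRS.2 x _ hroot0).1 h7⟩

theorem rootOfP_eq_iff_conn {f : Nat → Nat} {z w rz rw : Nat}
    (hz : rootOfP f z rz) (hw : rootOfP f w rw) :
    rz = rw ↔ connF f z w := by
  constructor
  · intro h
    exact ⟨rw, hw.1, h ▸ hz.2, hw.2⟩
  · rintro ⟨r, hr, hzr, hwr⟩
    have e1 : r = rz := reach_unique hr hz.1 hzr hz.2
    have e2 : r = rw := reach_unique hr hw.1 hwr hw.2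
    rw [← e1, ← e2]

-- generic early-exit any-fold
theorem any_fold_spec {γ : Type} (I : UF → Prop) (q : γ → Bool) (l : List γ)
    (stepA : UF × Bool → γ → UF × Bool)
    (h : ∀ c ∈ l, ∀ uf b, I uf → I (stepA (uf, b) c).1 ∧ (stepA (uf, b) c).2 = (b || q c)) :
    ∀ uf b, I uf → I (l.foldl stepA (uf, b)).1 ∧ (l.foldl stepA (uf, b)).2 = (b || l.any q) := by
  induction l with
  | nil => intro uf b hI; exact ⟨hI, by simp⟩
  | cons c l ih =>
    intro uf b hI
    obtain ⟨hI', hv⟩ := h c (by simp) uf b hI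
    have hstep : stepA (uf, b) c = ((stepA (uf, b) c).1, (stepA (uf, b) c).2) := rfl
    rw [List.foldl_cons, hstep, hv]
    obtain ⟨hI'', hv'⟩ := ih (fun c' hc' => h c' (by simp [hc'])) (stepA (uf, b) c).1 (b || q c) hI'
    refine ⟨hI'', ?_⟩
    rw [hv']
    simp [List.any_cons, Bool.or_assoc]
-- ===== phase 2: the per-direction scan =====
theorem dir_cell_eq {n : Nat} {f0 : Nat → Nat} {gs : List (List Nat)}
    (matrix : List (List Int)) (ROW COL : Nat) {root1 root2 : Nat}
    (hn : n = ROW * COL + 10)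
    (hpw : gs.Pairwise (fun g h => ∀ w, w ∈ g → w ∉ h))
    (hRel : ∀ x y, x < n → y < n → (connF f0 x y ↔ (x = y ∨ inSame gs x y)))
    (hr1 : rootOfP f0 (ROW * COL + 5) root1) (hr2 : rootOfP f0 (ROW * COL + 6) root2)
    (hner : root1 ≠ root2) (r c : Nat) :
    ∀ (ds : List (Int × Int)) (uf : UF) (S : PySem.Set Nat) (s : Bool × Bool),
      P2Inv n f0 uf → (root1 ∈ S ↔ s.1 = true) → (root2 ∈ S ↔ s.2 = true) →
      P2Inv n f0 (ds.foldl (fun (acc : UF × PySem.Set Nat) d =>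
          let nr : Int := (r : Int) + d.1
          let nc : Int := (c : Int) + d.2
          if 0 ≤ nr ∧ nr < (ROW : Int) ∧ 0 ≤ nc ∧ nc < (COL : Int) then
            if matGet matrix nr.toNat nc.toNat = 1 then
              let fr := ufFind acc.1.n acc.1 (nr.toNat * COL + nc.toNat)
              (fr.1, PySem.Set.add acc.2 fr.2)
            else acc
          else if nr < 0 ∨ (COL : Int) ≤ nc then (acc.1, PySem.Set.add acc.2 root1)
          else if (ROW : Int) ≤ nr ∨ nc < 0 then (acc.1, PySem.Set.add acc.2 root2)
          else acc) (uf, S)).1 ∧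
      ((root1 ∈ (ds.foldl (fun (acc : UF × PySem.Set Nat) d =>
          let nr : Int := (r : Int) + d.1
          let nc : Int := (c : Int) + d.2
          if 0 ≤ nr ∧ nr < (ROW : Int) ∧ 0 ≤ nc ∧ nc < (COL : Int) then
            if matGet matrix nr.toNat nc.toNat = 1 then
              let fr := ufFind acc.1.n acc.1 (nr.toNat * COL + nc.toNat)
              (fr.1, PySem.Set.add acc.2 fr.2)
            else acc
          else if nr < 0 ∨ (COL : Int) ≤ nc then (acc.1, PySem.Set.add acc.2 root1)
          else if (ROW : Int) ≤ nr ∨ nc < 0 then (acc.1, PySem.Set.add acc.2 root2)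
          else acc) (uf, S)).2) ↔ ((ds.foldl (fun (s : Bool × Bool) d =>
          let nr : Int := (r : Int) + d.1
          let nc : Int := (c : Int) + d.2
          if 0 ≤ nr ∧ nr < (ROW : Int) ∧ 0 ≤ nc ∧ nc < (COL : Int) then
            if matGet matrix nr.toNat nc.toNat = 1 then
              (s.1 || togetherG gs (nr.toNat * COL + nc.toNat) (ROW * COL + 5),
               s.2 || togetherG gs (nr.toNat * COL + nc.toNat) (ROW * COL + 6))
            else s
          else if nr < 0 ∨ (COL : Int) ≤ nc then (true, s.2)
          else (s.1, true)) s).1 = true)) ∧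
      ((root2 ∈ (ds.foldl (fun (acc : UF × PySem.Set Nat) d =>
          let nr : Int := (r : Int) + d.1
          let nc : Int := (c : Int) + d.2
          if 0 ≤ nr ∧ nr < (ROW : Int) ∧ 0 ≤ nc ∧ nc < (COL : Int) then
            if matGet matrix nr.toNat nc.toNat = 1 then
              let fr := ufFind acc.1.n acc.1 (nr.toNat * COL + nc.toNat)
              (fr.1, PySem.Set.add acc.2 fr.2)
            else acc
          else if nr < 0 ∨ (COL : Int) ≤ nc then (acc.1, PySem.Set.add acc.2 root1)
          else if (ROW : Int) ≤ nr ∨ nc < 0 then (acc.1, PySem.Set.add acc.2 root2)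
          else acc) (uf, S)).2) ↔ ((ds.foldl (fun (s : Bool × Bool) d =>
          let nr : Int := (r : Int) + d.1
          let nc : Int := (c : Int) + d.2
          if 0 ≤ nr ∧ nr < (ROW : Int) ∧ 0 ≤ nc ∧ nc < (COL : Int) then
            if matGet matrix nr.toNat nc.toNat = 1 then
              (s.1 || togetherG gs (nr.toNat * COL + nc.toNat) (ROW * COL + 5),
               s.2 || togetherG gs (nr.toNat * COL + nc.toNat) (ROW * COL + 6))
            else s
          else if nr < 0 ∨ (COL : Int) ≤ nc then (true, s.2)
          else (s.1, true)) s).2 = true)) := by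
  intro ds
  induction ds with
  | nil =>
    intro uf S s hP h1 h2
    exact ⟨hP, h1, h2⟩
  | cons d ds ih =>
    intro uf S s hP h1 h2
    simp only [List.foldl_cons]
    by_cases hin : 0 ≤ (r : Int) + d.1 ∧ (r : Int) + d.1 < (ROW : Int) ∧
        0 ≤ (c : Int) + d.2 ∧ (c : Int) + d.2 < (COL : Int)
    · rw [if_pos hin, if_pos hin]
      by_cases hnb : matGet matrix ((r : Int) + d.1).toNat ((c : Int) + d.2).toNat = 1
      · rw [if_pos hnb, if_pos hnb]
        have hz : ((r : Int) + d.1).toNat * COL + ((c : Int) + d.2).toNat < n := by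
          have h := cell_lt ROW COL ((r : Int) + d.1).toNat ((c : Int) + d.2).toNat
            (by omega) (by omega)
          omega
        obtain ⟨hP', hroot⟩ := p2_find hP hz
        apply ih
        · exact hP'
        · rw [PySem.Set.mem_add]
          rw [Bool.or_eq_true]
          constructor
          · rintro (h | h)
            · exact Or.inl (h1.1 h)
            · refine Or.inr ((togetherG_iff hpw).2 ?_)
              have := (rootOfP_eq_iff_conn hroot hr1).1 h.symm
              exact (hRel _ _ hz (by omega)).1 this
          · rintro (h | h)
            · exact Or.inl (h1.2 h)
            · refine Or.inr ?_
              have hconn := (hRel _ _ hz (by omega)).2 ((togetherG_iff hpw).1 h)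
              exact ((rootOfP_eq_iff_conn hroot hr1).2 hconn).symm
        · rw [PySem.Set.mem_add]
          rw [Bool.or_eq_true]
          constructor
          · rintro (h | h)
            · exact Or.inl (h2.1 h)
            · refine Or.inr ((togetherG_iff hpw).2 ?_)
              have := (rootOfP_eq_iff_conn hroot hr2).1 h.symm
              exact (hRel _ _ hz (by omega)).1 this
          · rintro (h | h)
            · exact Or.inl (h2.2 h)
            · refine Or.inr ?_
              have hconn := (hRel _ _ hz (by omega)).2 ((togetherG_iff hpw).1 h)
              exact ((rootOfP_eq_iff_conn hroot hr2).2 hconn).symm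
      · rw [if_neg hnb, if_neg hnb]
        exact ih uf S s hP h1 h2
    · rw [if_neg hin, if_neg hin]
      by_cases hp1 : (r : Int) + d.1 < 0 ∨ (COL : Int) ≤ (c : Int) + d.2
      · rw [if_pos hp1, if_pos hp1]
        apply ih
        · exact hP
        · rw [PySem.Set.mem_add]
          simp
        · rw [PySem.Set.mem_add]
          constructor
          · rintro (h | h)
            · exact h2.1 h
            · exact absurd h.symm hner
          · intro h
            exact Or.inl (h2.2 h)
      · rw [if_neg hp1, if_neg hp1]
        have hp2 : (ROW : Int) ≤ (r : Int) + d.1 ∨ (c : Int) + d.2 < 0 := by omega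
        rw [if_pos hp2]
        apply ih
        · exact hP
        · rw [PySem.Set.mem_add]
          constructor
          · rintro (h | h)
            · exact h1.1 h
            · exact absurd h hner
          · intro h
            exact Or.inl (h1.2 h)
        · rw [PySem.Set.mem_add]
          simp
-- ===== phase 2: whole scan =====
theorem phase2_result {n : Nat} {f0 : Nat → Nat} {gs : List (List Nat)}
    (matrix : List (List Int)) (ROW COL : Nat) {root1 root2 : Nat}
    (hn : n = ROW * COL + 10)
    (hpw : gs.Pairwise (fun g h => ∀ w, w ∈ g → w ∉ h))
    (hRel : ∀ x y, x < n → y < n → (connF f0 x y ↔ (x = y ∨ inSame gs x y)))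
    (hr1 : rootOfP f0 (ROW * COL + 5) root1) (hr2 : rootOfP f0 (ROW * COL + 6) root2)
    (hner : root1 ≠ root2) (uf : UF) (hP : P2Inv n f0 uf) :
    (aPhase2 matrix ROW COL root1 root2 uf).2 =
      (List.range ROW).any (fun r => (List.range COL).any (fun c =>
        bCellSees matrix ROW COL (ROW * COL + 5) (ROW * COL + 6) gs r c)) := by
  have hcell : ∀ (r : Nat), ∀ c ∈ List.range COL, ∀ (uf' : UF) (b : Bool), P2Inv n f0 uf' →
      P2Inv n f0 (((fun (st : UF × Bool) c =>
        if st.2 then st else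
        if matGet matrix r c = 0 then
          if (r = 0 ∧ c = 0) ∨ (r = ROW - 1 ∧ c = COL - 1) then st
          else
            let acc := DIR8L.foldl (fun (acc : UF × PySem.Set Nat) d =>
              let nr : Int := (r : Int) + d.1
              let nc : Int := (c : Int) + d.2
              if 0 ≤ nr ∧ nr < (ROW : Int) ∧ 0 ≤ nc ∧ nc < (COL : Int) then
                if matGet matrix nr.toNat nc.toNat = 1 then
                  let fr := ufFind acc.1.n acc.1 (nr.toNat * COL + nc.toNat)
                  (fr.1, PySem.Set.add acc.2 fr.2)
                else acc
              else if nr < 0 ∨ (COL : Int) ≤ nc then (acc.1, PySem.Set.add acc.2 root1)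
              else if (ROW : Int) ≤ nr ∨ nc < 0 then (acc.1, PySem.Set.add acc.2 root2)
              else acc) (st.1, PySem.Set.empty)
            if root1 ∈ acc.2 ∧ root2 ∈ acc.2 then (acc.1, true) else (acc.1, false)
        else st) (uf', b) c)).1 ∧
      ((fun (st : UF × Bool) c =>
        if st.2 then st else
        if matGet matrix r c = 0 then
          if (r = 0 ∧ c = 0) ∨ (r = ROW - 1 ∧ c = COL - 1) then st
          else
            let acc := DIR8L.foldl (fun (acc : UF × PySem.Set Nat) d =>
              let nr : Int := (r : Int) + d.1
              let nc : Int := (c : Int) + d.2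
              if 0 ≤ nr ∧ nr < (ROW : Int) ∧ 0 ≤ nc ∧ nc < (COL : Int) then
                if matGet matrix nr.toNat nc.toNat = 1 then
                  let fr := ufFind acc.1.n acc.1 (nr.toNat * COL + nc.toNat)
                  (fr.1, PySem.Set.add acc.2 fr.2)
                else acc
              else if nr < 0 ∨ (COL : Int) ≤ nc then (acc.1, PySem.Set.add acc.2 root1)
              else if (ROW : Int) ≤ nr ∨ nc < 0 then (acc.1, PySem.Set.add acc.2 root2)
              else acc) (st.1, PySem.Set.empty)
            if root1 ∈ acc.2 ∧ root2 ∈ acc.2 then (acc.1, true) else (acc.1, false)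
        else st) (uf', b) c).2 =
        (b || bCellSees matrix ROW COL (ROW * COL + 5) (ROW * COL + 6) gs r c) := by
    intro r c hcm uf' b hI
    dsimp only
    by_cases hb : b = true
    · rw [if_pos hb]
      exact ⟨hI, by rw [hb]; simp⟩
    · rw [if_neg hb]
      have hbf : b = false := by
        cases b
        · rfl
        · exact absurd rfl hb
      subst hbf
      by_cases h0 : matGet matrix r c = 0
      · rw [if_pos h0]
        by_cases hcor : (r = 0 ∧ c = 0) ∨ (r = ROW - 1 ∧ c = COL - 1)
        · rw [if_pos hcor]
          refine ⟨hI, ?_⟩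
          have hq : bCellSees matrix ROW COL (ROW * COL + 5) (ROW * COL + 6) gs r c = false := by
            simp only [bCellSees]
            rw [if_neg (fun hcontra => hcontra.2 hcor)]
          rw [hq]
          rfl
        · rw [if_neg hcor]
          obtain ⟨hPacc, hiff1, hiff2⟩ := dir_cell_eq matrix ROW COL hn hpw hRel hr1 hr2 hner
            r c DIR8L uf' PySem.Set.empty (false, false) hI (by simp [PySem.Set.empty])
            (by simp [PySem.Set.empty])
          constructor
          · split
            · exact hPacc
            · exact hPacc
          · rw [Bool.false_or]
            have hq : bCellSees matrix ROW COL (ROW * COL + 5) (ROW * COL + 6) gs r c =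
                ((DIR8L.foldl (fun (s : Bool × Bool) d =>
                  let nr : Int := (r : Int) + d.1
                  let nc : Int := (c : Int) + d.2
                  if 0 ≤ nr ∧ nr < (ROW : Int) ∧ 0 ≤ nc ∧ nc < (COL : Int) then
                    if matGet matrix nr.toNat nc.toNat = 1 then
                      (s.1 || togetherG gs (nr.toNat * COL + nc.toNat) (ROW * COL + 5),
                       s.2 || togetherG gs (nr.toNat * COL + nc.toNat) (ROW * COL + 6))
                    else s
                  else if nr < 0 ∨ (COL : Int) ≤ nc then (true, s.2)
                  else (s.1, true)) (false, false)).1 &&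
                 (DIR8L.foldl (fun (s : Bool × Bool) d =>
                  let nr : Int := (r : Int) + d.1
                  let nc : Int := (c : Int) + d.2
                  if 0 ≤ nr ∧ nr < (ROW : Int) ∧ 0 ≤ nc ∧ nc < (COL : Int) then
                    if matGet matrix nr.toNat nc.toNat = 1 then
                      (s.1 || togetherG gs (nr.toNat * COL + nc.toNat) (ROW * COL + 5),
                       s.2 || togetherG gs (nr.toNat * COL + nc.toNat) (ROW * COL + 6))
                    else s
                  else if nr < 0 ∨ (COL : Int) ≤ nc then (true, s.2)
                  else (s.1, true)) (false, false)).2) := by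
              simp only [bCellSees]
              rw [if_pos ⟨h0, hcor⟩]
            rw [hq]
            split
            · rename_i hboth
              symm
              rw [Bool.and_eq_true]
              exact ⟨hiff1.1 hboth.1, hiff2.1 hboth.2⟩
            · rename_i hnboth
              symm
              cases hv : ((DIR8L.foldl _ (false, false)).1 && (DIR8L.foldl _ (false, false)).2) with
              | false => rfl
              | true =>
                exfalso
                rw [Bool.and_eq_true] at hv
                exact hnboth ⟨hiff1.2 hv.1, hiff2.2 hv.2⟩
      · rw [if_neg h0]
        refine ⟨hI, ?_⟩
        have hq : bCellSees matrix ROW COL (ROW * COL + 5) (ROW * COL + 6) gs r c = false := by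
          simp only [bCellSees]
          rw [if_neg (fun hcontra => h0 hcontra.1)]
        rw [hq]
        rfl
  have houter := any_fold_spec (P2Inv n f0)
    (fun r => (List.range COL).any (fun c =>
      bCellSees matrix ROW COL (ROW * COL + 5) (ROW * COL + 6) gs r c))
    (List.range ROW)
    (fun (st : UF × Bool) r =>
      (List.range COL).foldl (fun (st : UF × Bool) c =>
        if st.2 then st else
        if matGet matrix r c = 0 then
          if (r = 0 ∧ c = 0) ∨ (r = ROW - 1 ∧ c = COL - 1) then st
          else
            let acc := DIR8L.foldl (fun (acc : UF × PySem.Set Nat) d =>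
              let nr : Int := (r : Int) + d.1
              let nc : Int := (c : Int) + d.2
              if 0 ≤ nr ∧ nr < (ROW : Int) ∧ 0 ≤ nc ∧ nc < (COL : Int) then
                if matGet matrix nr.toNat nc.toNat = 1 then
                  let fr := ufFind acc.1.n acc.1 (nr.toNat * COL + nc.toNat)
                  (fr.1, PySem.Set.add acc.2 fr.2)
                else acc
              else if nr < 0 ∨ (COL : Int) ≤ nc then (acc.1, PySem.Set.add acc.2 root1)
              else if (ROW : Int) ≤ nr ∨ nc < 0 then (acc.1, PySem.Set.add acc.2 root2)
              else acc) (st.1, PySem.Set.empty)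
            if root1 ∈ acc.2 ∧ root2 ∈ acc.2 then (acc.1, true) else (acc.1, false)
        else st) st)
    (fun r _ uf' b hI => any_fold_spec (P2Inv n f0)
      (fun c => bCellSees matrix ROW COL (ROW * COL + 5) (ROW * COL + 6) gs r c)
      (List.range COL) _ (hcell r) uf' b hI)
    uf false hP
  have hA : aPhase2 matrix ROW COL root1 root2 uf =
      (List.range ROW).foldl (fun (st : UF × Bool) r =>
        (List.range COL).foldl (fun (st : UF × Bool) c =>
          if st.2 then st else
          if matGet matrix r c = 0 then
            if (r = 0 ∧ c = 0) ∨ (r = ROW - 1 ∧ c = COL - 1) then st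
            else
              let acc := DIR8L.foldl (fun (acc : UF × PySem.Set Nat) d =>
                let nr : Int := (r : Int) + d.1
                let nc : Int := (c : Int) + d.2
                if 0 ≤ nr ∧ nr < (ROW : Int) ∧ 0 ≤ nc ∧ nc < (COL : Int) then
                  if matGet matrix nr.toNat nc.toNat = 1 then
                    let fr := ufFind acc.1.n acc.1 (nr.toNat * COL + nc.toNat)
                    (fr.1, PySem.Set.add acc.2 fr.2)
                  else acc
                else if nr < 0 ∨ (COL : Int) ≤ nc then (acc.1, PySem.Set.add acc.2 root1)
                else if (ROW : Int) ≤ nr ∨ nc < 0 then (acc.1, PySem.Set.add acc.2 root2)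
                else acc) (st.1, PySem.Set.empty)
              if root1 ∈ acc.2 ∧ root2 ∈ acc.2 then (acc.1, true) else (acc.1, false)
          else st) st) (uf, false) := rfl
  rw [hA, houter.2, Bool.false_or]

-- ===== top-level glue: A equals the proof-side model =====
theorem core_eq (matrix : List (List Int)) (ROW COL : Nat) :
    (let P1 := ROW * COL + 5
     let P2 := ROW * COL + 6
     let uf := aPhase1 matrix ROW COL P1 P2
     let fc1 := ufFind uf.n uf P1
     let fc2 := ufFind fc1.1.n fc1.1 P2
     if fc1.2 = fc2.2 then (0 : Int)
     else
       let f1 := ufFind fc2.1.n fc2.1 P1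
       let f2 := ufFind f1.1.n f1.1 P2
       if (aPhase2 matrix ROW COL f1.2 f2.2 f2.1).2 then 1 else 2) =
    (let P1 := ROW * COL + 5
     let P2 := ROW * COL + 6
     let gs := bPhase1 matrix ROW COL P1 P2
     if togetherG gs P1 P2 then (0 : Int)
     else if (List.range ROW).any (fun r => (List.range COL).any (fun c =>
       bCellSees matrix ROW COL P1 P2 gs r c)) then 1 else 2) := by
  obtain ⟨uf0, huf0⟩ : ∃ u, u = aPhase1 matrix ROW COL (ROW * COL + 5) (ROW * COL + 6) := ⟨_, rfl⟩
  obtain ⟨gs, hgs⟩ : ∃ g, g = bPhase1 matrix ROW COL (ROW * COL + 5) (ROW * COL + 6) := ⟨_, rfl⟩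
  have hI : InvR (ROW * COL + 10) uf0 gs := by
    rw [huf0, hgs]; exact phase1_invr matrix ROW COL
  dsimp only
  rw [← huf0, ← hgs]
  obtain ⟨hn, hsz, hcl, hroots, hG, hRel⟩ := hI
  have hP0 : P2Inv (ROW * COL + 10) (pfUF uf0) uf0 :=
    ⟨hn, hsz, hcl, fun z hz => hroots z hz, rootsame_refl _⟩
  have hP1n : ROW * COL + 5 < ROW * COL + 10 := by omega
  have hP2n : ROW * COL + 6 < ROW * COL + 10 := by omega
  obtain ⟨hPfc1, hrfc1⟩ := p2_find hP0 hP1n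
  obtain ⟨hPfc2, hrfc2⟩ := p2_find hPfc1 hP2n
  have hconds := (rootOfP_eq_iff_conn hrfc1 hrfc2).trans
    ((hRel _ _ hP1n hP2n).trans (togetherG_iff hG.2).symm)
  by_cases hc : togetherG gs (ROW * COL + 5) (ROW * COL + 6) = true
  · rw [if_pos (hconds.2 hc), if_pos hc]
  · rw [if_neg (fun h => hc (hconds.1 h)), if_neg hc]
    obtain ⟨hPf1, hrf1⟩ := p2_find hPfc2 hP1n
    obtain ⟨hPf2, hrf2⟩ := p2_find hPf1 hP2n
    have hner := fun h => hc (((rootOfP_eq_iff_conn hrf1 hrf2).trans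
      ((hRel _ _ hP1n hP2n).trans (togetherG_iff hG.2).symm)).1 h)
    rw [phase2_result matrix ROW COL rfl hG.2 hRel hrf1 hrf2 hner _ hPf2]

-- ===== bridge: B's staged formulation equals the proof-side model =====

theorem foldl_flatMap' {α β γ : Type} (l : List α) (f : α → List β) (g : γ → β → γ) :
    ∀ (init : γ), (l.flatMap f).foldl g init = l.foldl (fun acc x => (f x).foldl g acc) init := by
  induction l with
  | nil => intro init; rfl
  | cons a l ih =>
    intro init
    rw [List.flatMap_cons, List.foldl_append, List.foldl_cons, ih]

theorem foldl_filterMap' {α β γ : Type} (l : List α) (f : α → Option β) (g : γ → β → γ) :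
    ∀ (init : γ), (l.filterMap f).foldl g init =
      l.foldl (fun acc x => match f x with | some b => g acc b | none => acc) init := by
  induction l with
  | nil => intro init; rfl
  | cons a l ih =>
    intro init
    cases h : f a with
    | none => rw [List.filterMap_cons, h, List.foldl_cons, h, ih]
    | some b => rw [List.filterMap_cons, h, List.foldl_cons, List.foldl_cons, h, ih]

theorem foldl_congr' {α β : Type} (l : List β) (f g : α → β → α)
    (h : ∀ a b, b ∈ l → f a b = g a b) : ∀ init, l.foldl f init = l.foldl g init := by
  induction l with
  | nil => intro init; rfl
  | cons x l ih =>
    intro init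
    rw [List.foldl_cons, List.foldl_cons, h init x (by simp)]
    exact ih (fun a b hb => h a b (by simp [hb])) _

theorem edge_fold_eq (matrix : List (List Int)) (ROW COL P1 P2 : Nat) :
    (edgeList matrix ROW COL P1 P2).foldl (fun gs e => mergeG gs e.1 e.2) [] =
      bPhase1 matrix ROW COL P1 P2 := by
  unfold edgeList bPhase1
  rw [foldl_flatMap']
  apply foldl_congr'
  intro gs r _
  rw [foldl_flatMap']
  apply foldl_congr'
  intro gs' c _
  by_cases hobs : matGet matrix r c = 1
  · rw [if_pos hobs, if_pos hobs, foldl_filterMap']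
    apply foldl_congr'
    intro gs'' d _
    simp only [tgt?]
    split_ifs <;> rfl
  · rw [if_neg hobs, if_neg hobs]
    rfl

theorem any_congr_mem {α : Type} (l : List α) (p q : α → Bool)
    (h : ∀ a ∈ l, p a = q a) : l.any p = l.any q := by
  induction l with
  | nil => rfl
  | cons a l ih =>
    rw [List.any_cons, List.any_cons, h a (by simp), ih (fun a' ha' => h a' (by simp [ha']))]

theorem pair_or_foldl {γ : Type} (p q : γ → Bool) :
    ∀ (l : List γ) (a b : Bool),
      l.foldl (fun (s : Bool × Bool) d => (s.1 || p d, s.2 || q d)) (a, b) =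
        (a || l.any p, b || l.any q) := by
  intro l
  induction l with
  | nil => intro a b; simp
  | cons d l ih =>
    intro a b
    rw [List.foldl_cons, ih, List.any_cons, List.any_cons]
    simp [Bool.or_assoc]

theorem dir8_small : ∀ d ∈ DIR8L, -1 ≤ d.1 ∧ d.1 ≤ 1 ∧ -1 ≤ d.2 ∧ d.2 ≤ 1 := by decide

theorem cellSees_eq (matrix : List (List Int)) (ROW COL P1 P2 : Nat)
    (gs : List (List Nat)) (r c : Nat) (hr : r < ROW) (hc : c < COL) :
    ((decide (matGet matrix r c = 0) &&
       !((decide (r = 0) && decide (c = 0)) ||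
         (decide (r = ROW - 1) && decide (c = COL - 1)))) &&
     (seesTop matrix ROW COL P1 gs r c && seesBot matrix ROW COL P2 gs r c)) =
      bCellSees matrix ROW COL P1 P2 gs r c := by
  unfold bCellSees
  by_cases hg : matGet matrix r c = 0 ∧ ¬((r = 0 ∧ c = 0) ∨ (r = ROW - 1 ∧ c = COL - 1))
  · rw [if_pos hg]
    have hguard : (decide (matGet matrix r c = 0) &&
        !((decide (r = 0) && decide (c = 0)) ||
          (decide (r = ROW - 1) && decide (c = COL - 1)))) = true := by
      obtain ⟨h0, hnc⟩ := hg
      simp only [Bool.and_eq_true, Bool.not_eq_true', Bool.or_eq_false_iff,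
        Bool.and_eq_false_iff, decide_eq_true_eq, decide_eq_false_iff_not]
      refine ⟨h0, ?_, ?_⟩ <;> [skip; skip] <;>
        · by_contra hcon
          push_neg at hcon
          exact hnc (by tauto)
    rw [hguard, Bool.true_and]
    -- rewrite the model's pair fold into two `any`s
    have hstep : (fun (s : Bool × Bool) (d : Int × Int) =>
        let nr : Int := (r : Int) + d.1
        let nc : Int := (c : Int) + d.2
        if 0 ≤ nr ∧ nr < (ROW : Int) ∧ 0 ≤ nc ∧ nc < (COL : Int) then
          if matGet matrix nr.toNat nc.toNat = 1 then
            (s.1 || togetherG gs (nr.toNat * COL + nc.toNat) P1,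
             s.2 || togetherG gs (nr.toNat * COL + nc.toNat) P2)
          else s
        else if nr < 0 ∨ (COL : Int) ≤ nc then (true, s.2)
        else (s.1, true)) =
      (fun (s : Bool × Bool) (d : Int × Int) =>
        (s.1 ||
          (if 0 ≤ (r : Int) + d.1 ∧ (r : Int) + d.1 < (ROW : Int) ∧
              0 ≤ (c : Int) + d.2 ∧ (c : Int) + d.2 < (COL : Int) then
            decide (matGet matrix ((r : Int) + d.1).toNat ((c : Int) + d.2).toNat = 1) &&
              togetherG gs (((r : Int) + d.1).toNat * COL + ((c : Int) + d.2).toNat) P1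
          else decide ((r : Int) + d.1 < 0 ∨ (COL : Int) ≤ (c : Int) + d.2)),
         s.2 ||
          (if 0 ≤ (r : Int) + d.1 ∧ (r : Int) + d.1 < (ROW : Int) ∧
              0 ≤ (c : Int) + d.2 ∧ (c : Int) + d.2 < (COL : Int) then
            decide (matGet matrix ((r : Int) + d.1).toNat ((c : Int) + d.2).toNat = 1) &&
              togetherG gs (((r : Int) + d.1).toNat * COL + ((c : Int) + d.2).toNat) P2
          else !decide ((r : Int) + d.1 < 0 ∨ (COL : Int) ≤ (c : Int) + d.2)))) := by
      funext s d
      dsimp only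
      split
      · split
        · rename_i hnb
          simp [hnb]
        · rename_i hnb
          simp [hnb]
      · split
        · rename_i hp1
          simp [hp1]
        · rename_i hp1
          simp [hp1]
    rw [hstep, pair_or_foldl, Bool.false_or, Bool.false_or]
    -- first component is literally seesTop; second needs the corner argument
    have h1 : (DIR8L.any fun d =>
        if 0 ≤ (r : Int) + d.1 ∧ (r : Int) + d.1 < (ROW : Int) ∧
            0 ≤ (c : Int) + d.2 ∧ (c : Int) + d.2 < (COL : Int) then
          decide (matGet matrix ((r : Int) + d.1).toNat ((c : Int) + d.2).toNat = 1) &&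
            togetherG gs (((r : Int) + d.1).toNat * COL + ((c : Int) + d.2).toNat) P1
        else decide ((r : Int) + d.1 < 0 ∨ (COL : Int) ≤ (c : Int) + d.2)) =
        seesTop matrix ROW COL P1 gs r c := rfl
    have h2 : (DIR8L.any fun d =>
        if 0 ≤ (r : Int) + d.1 ∧ (r : Int) + d.1 < (ROW : Int) ∧
            0 ≤ (c : Int) + d.2 ∧ (c : Int) + d.2 < (COL : Int) then
          decide (matGet matrix ((r : Int) + d.1).toNat ((c : Int) + d.2).toNat = 1) &&
            togetherG gs (((r : Int) + d.1).toNat * COL + ((c : Int) + d.2).toNat) P2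
        else !decide ((r : Int) + d.1 < 0 ∨ (COL : Int) ≤ (c : Int) + d.2)) =
        seesBot matrix ROW COL P2 gs r c := by
      unfold seesBot
      apply any_congr_mem
      intro d hd
      dsimp only
      split
      · rfl
      · rename_i hout
        have hds := dir8_small d hd
        have hnc := hg.2
        have : (¬((r : Int) + d.1 < 0 ∨ (COL : Int) ≤ (c : Int) + d.2)) ↔
            ((ROW : Int) ≤ (r : Int) + d.1 ∨ (c : Int) + d.2 < 0) := by
          constructor
          · intro h
            push_neg at h
            omega
          · intro h
            push_neg
            rcases h with h | h
            · constructor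
              · omega
              · -- nc < COL: else the cell would be the bottom-right corner
                by_contra hcol
                push_neg at hcol
                have hc1 : c = COL - 1 := by omega
                have hr1 : r = ROW - 1 := by omega
                exact hnc (Or.inr ⟨hr1, hc1⟩)
            · constructor
              · -- 0 ≤ nr: else the cell would be the top-left corner
                by_contra hrow
                push_neg at hrow
                have hc0 : c = 0 := by omega
                have hr0 : r = 0 := by omega
                exact hnc (Or.inl ⟨hr0, hc0⟩)
              · omega
        rw [← decide_not]
        exact decide_eq_decide.mpr this
    rw [h1, h2]
  · rw [if_neg hg]
    have hguard : (decide (matGet matrix r c = 0) &&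
        !((decide (r = 0) && decide (c = 0)) ||
          (decide (r = ROW - 1) && decide (c = COL - 1)))) = false := by
      by_contra hcon
      rw [Bool.not_eq_false] at hcon
      simp only [Bool.and_eq_true, Bool.not_eq_true', Bool.or_eq_false_iff,
        Bool.and_eq_false_iff, decide_eq_true_eq, decide_eq_false_iff_not] at hcon
      exact hg ⟨hcon.1, by tauto⟩
    rw [hguard, Bool.false_and]

theorem alt_eq_model (matrix : List (List Int)) :
    solve_alt matrix =
    (let ROW := matrix.length
     let COL := (matrix.headD []).length
     let P1 := ROW * COL + 5
     let P2 := ROW * COL + 6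
     let gs := bPhase1 matrix ROW COL P1 P2
     if togetherG gs P1 P2 then (0 : Int)
     else if (List.range ROW).any (fun r => (List.range COL).any (fun c =>
       bCellSees matrix ROW COL P1 P2 gs r c)) then 1 else 2) := by
  unfold solve_alt
  dsimp only
  rw [edge_fold_eq]
  by_cases hc : togetherG (bPhase1 matrix matrix.length (matrix.headD []).length
      (matrix.length * (matrix.headD []).length + 5)
      (matrix.length * (matrix.headD []).length + 6))
      (matrix.length * (matrix.headD []).length + 5)
      (matrix.length * (matrix.headD []).length + 6) = true
  · rw [if_pos hc, if_pos hc]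
  · rw [if_neg hc, if_neg hc]
    have hany : ((List.range matrix.length).any (fun r =>
        (List.range (matrix.headD []).length).any (fun c =>
          (decide (matGet matrix r c = 0) &&
            !((decide (r = 0) && decide (c = 0)) ||
              (decide (r = matrix.length - 1) &&
                decide (c = (matrix.headD []).length - 1)))) &&
          (seesTop matrix matrix.length (matrix.headD []).length
              (matrix.length * (matrix.headD []).length + 5)
              (bPhase1 matrix matrix.length (matrix.headD []).length
                (matrix.length * (matrix.headD []).length + 5)
                (matrix.length * (matrix.headD []).length + 6)) r c &&
            seesBot matrix matrix.length (matrix.headD []).length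
              (matrix.length * (matrix.headD []).length + 6)
              (bPhase1 matrix matrix.length (matrix.headD []).length
                (matrix.length * (matrix.headD []).length + 5)
                (matrix.length * (matrix.headD []).length + 6)) r c)))) =
        ((List.range matrix.length).any (fun r =>
          (List.range (matrix.headD []).length).any (fun c =>
            bCellSees matrix matrix.length (matrix.headD []).length
              (matrix.length * (matrix.headD []).length + 5)
              (matrix.length * (matrix.headD []).length + 6)
              (bPhase1 matrix matrix.length (matrix.headD []).length
                (matrix.length * (matrix.headD []).length + 5)
                (matrix.length * (matrix.headD []).length + 6)) r c))) := by
      apply any_congr_mem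
      intro r hrm
      apply any_congr_mem
      intro c hcm
      exact cellSees_eq matrix matrix.length (matrix.headD []).length _ _ _ r c
        (List.mem_range.1 hrm) (List.mem_range.1 hcm)
    rw [hany]

theorem solve_eq (matrix : List (List Int)) : solve matrix = solve_alt matrix := by
  rw [alt_eq_model]
  exact core_eq matrix matrix.length (matrix.headD []).length

-- ===== VERDICT (by name: the statement is the Claim_ definition above) =====
theorem solve_spec : Claim_equal_solve := by
  intro matrix _ _
  exact solve_eq matrix
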